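-- pv_equiv track=rewrite | github.com/han0gu/programmers-high-score-kit | graph/farthest_node/psy/solution.py | solution
-- ===== SOURCE A (Python) =====
-- from collections import defaultdict, deque
--
-- def solution(n, edge):
--     # node : n
--     # starts: 1
--     INF = 50001
--     graph = defaultdict(list)
--     graph[0] = []
--     visited = set()
--     dist = [INF for _ in range(n+1)]
--     dist[1] = 0 # start point
--
--     for src, dst in edge:
--         graph[src].append(dst)
--         graph[dst].append(src)
--
--     q = deque()
--     q.append(1)
--
--     far = 0
--     while q:
--         cur = q.popleft()
--         for node in graph[cur]:
--             if node in visited: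
--                 continue
--             if dist[cur] + 1 < dist[node]: # 최단거리 갱신
--                 dist[node] = dist[cur] + 1
--                 far = max(far, dist[node])
--                 q.append(node)
--         visited.add(cur)
--
--     cnt = len([d for d in dist[1:] if d == far])
--
--     return cnt
-- ===== SOURCE B (Python) =====
-- def solution(n, edge):
--     INF = 50001
--     dist = {1: 0}
--     changed = True
--     while changed:
--         changed = False
--         for a, b in edge:
--             da = dist.get(a, INF)
--             if da + 1 < dist.get(b, INF):
--                 dist[b] = da + 1
--                 changed = True
--             db = dist.get(b, INF)
--             if db + 1 < dist.get(a, INF):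
--                 dist[a] = db + 1
--                 changed = True
--     far = max(dist.values())
--     return sum(1 for i in range(1, n + 1) if dist.get(i, INF) == far)
-- ===== Notes on version B (the rewrite author's own statement) =====
-- stated objective: alternative
-- what changed: Replaces A's queue-based BFS over a built adjacency list by Bellman-Ford-style relaxation: repeated passes directly over the raw edge list relaxing both directions of every edge in a distance dictionary until a full pass changes nothing; no adjacency list, no queue, no visited set, and the count is taken from the dictionary via range(1,n+1) lookups instead of a list slice.
-- outside the precondition, e.g. on solution(2, [(1, -1)]): A returns 1, B returns 0; on solution(2, [(1, 2), (3, 9)]): A returns 1, B returns 1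
import Mathlib
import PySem

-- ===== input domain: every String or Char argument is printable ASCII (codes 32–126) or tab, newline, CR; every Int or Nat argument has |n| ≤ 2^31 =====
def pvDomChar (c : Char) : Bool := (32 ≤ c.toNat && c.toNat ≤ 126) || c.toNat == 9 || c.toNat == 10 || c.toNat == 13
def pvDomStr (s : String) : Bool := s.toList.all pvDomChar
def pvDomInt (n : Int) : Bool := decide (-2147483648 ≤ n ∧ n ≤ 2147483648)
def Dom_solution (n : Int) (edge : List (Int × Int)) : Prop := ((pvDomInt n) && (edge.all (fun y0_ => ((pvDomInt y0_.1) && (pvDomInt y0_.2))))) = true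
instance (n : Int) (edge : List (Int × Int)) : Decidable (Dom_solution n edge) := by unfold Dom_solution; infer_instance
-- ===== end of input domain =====

-- B replaces A's queue-based BFS over a built adjacency list by Bellman-Ford-style
-- relaxation: repeated passes directly over the raw edge list, relaxing both directions
-- of every edge in a distance dictionary until a full pass changes nothing; the answer
-- is counted from the dictionary. An alternative algorithm, not claimed faster.

-- ===== PORT A =====
-- graph = defaultdict(list); graph[0] = []; for src, dst in edge: append both directions
def buildGraphA (edge : List (Int × Int)) : PySem.Dict Int (List Int) :=
  edge.foldl
    (fun g p =>
      let g1 := g.insert p.1 (g.getD p.1 [] ++ [p.2])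
      g1.insert p.2 (g1.getD p.2 [] ++ [p.1]))
    (PySem.Dict.empty.insert 0 [])

-- body of A's inner 'for node in graph[cur]' loop; state = (dist, q, far)
def stepA (vis : PySem.Set Int) (cur : Int) (s : List Int × List Int × Int) (node : Int) :
    List Int × List Int × Int :=
  if PySem.Set.contains vis node then s
  else
    let dc := PySem.List.pyGetD s.1 cur 0
    if dc + 1 < PySem.List.pyGetD s.1 node 0 then
      (PySem.List.pySetD s.1 node (dc + 1), s.2.1 ++ [node], max s.2.2 (dc + 1))
    else s

-- A's 'while q' loop; the fuel only bounds the number of iterations (with every edge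
-- endpoint in 0..n each cell of dist is written at most once, so n+2 iterations suffice)
def loopA (adj : PySem.Dict Int (List Int)) :
    Nat → List Int → List Int → PySem.Set Int → Int → List Int × Int
  | _, [], dist, _, far => (dist, far)
  | 0, _ :: _, dist, _, far => (dist, far)
  | fuel + 1, cur :: q, dist, vis, far =>
    let s := (adj.getD cur []).foldl (stepA vis cur) (dist, q, far)
    loopA adj fuel s.2.1 s.1 (PySem.Set.add vis cur) s.2.2

def solution (n : Int) (edge : List (Int × Int)) : Int :=
  let graph := buildGraphA edge
  let dist0 := (PySem.List.pyRange 0 (n + 1) 1).map (fun _ => (50001 : Int))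
  match PySem.List.pySet? dist0 1 0 with
  | none => 0   -- dist[1] = 0 raises IndexError (n < 1): outside Pre_
  | some dist =>
    let r := loopA graph (n.toNat + 2) [1] dist PySem.Set.empty 0
    (((PySem.List.slice r.1 (some 1) none).filter (fun x => x == r.2)).length : Int)

-- ===== PORT B =====
-- one edge of B's inner 'for a, b in edge' loop: relax both directions; state = (dist, changed)
def bfStep (s : PySem.Dict Int Int × Bool) (p : Int × Int) : PySem.Dict Int Int × Bool :=
  let da := s.1.getD p.1 50001
  let s1 := if da + 1 < s.1.getD p.2 50001 then (s.1.insert p.2 (da + 1), true) else s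
  let db := s1.1.getD p.2 50001
  if db + 1 < s1.1.getD p.1 50001 then (s1.1.insert p.1 (db + 1), true) else s1

-- B's 'while changed' loop; the fuel only bounds the number of passes (each changing
-- pass strictly decreases the total of the at most 2*len(edge)+1 dict values, each ≤ 50001)
def bfLoop (edge : List (Int × Int)) : Nat → PySem.Dict Int Int → PySem.Dict Int Int
  | 0, dist => dist
  | fuel + 1, dist =>
    let s := edge.foldl bfStep (dist, false)
    if s.2 then bfLoop edge fuel s.1 else s.1

def solution_alt (n : Int) (edge : List (Int × Int)) : Int :=
  let dist := bfLoop edge (50002 * (2 * edge.length + 1) + 1) (PySem.Dict.empty.insert 1 0)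
  let far := match PySem.List.max? dist.values (fun x => x) with
    | some m => m
    | none => 0   -- unreachable: dist always holds key 1 (max() on an empty dict would raise)
  (PySem.List.pyRange 1 (n + 1) 1).foldl
    (fun c i => if dist.getD i 50001 == far then c + 1 else c) 0

-- ===== PRECONDITION & SPEC =====
-- Pre_ keeps n ≥ 1 and either every edge endpoint in 0..n or node 1 absent from the edges
-- (then the BFS from 1 touches nothing and both programs return 1): an out-of-range endpoint
-- that is reachable from node 1 raises IndexError in A (dist has length n+1), reachability is
-- not a closed-form condition, and a reachable negative endpoint's value in A arises from
-- Python negative-index wraparound (label -k aliasing slot n+1-k of dist), a defensible-corner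
-- artefact no caller of this BFS exercise would specify.
def Pre_solution (n : Int) (edge : List (Int × Int)) : Prop :=
  1 ≤ n ∧ ((∀ p ∈ edge, 0 ≤ p.1 ∧ p.1 ≤ n ∧ 0 ≤ p.2 ∧ p.2 ≤ n) ∨
    (∀ p ∈ edge, p.1 ≠ 1 ∧ p.2 ≠ 1))
instance (n : Int) (edge : List (Int × Int)) : Decidable (Pre_solution n edge) := by
  unfold Pre_solution; infer_instance

def pvWitness_solution : Int × (List (Int × Int)) := (3, [(1, 2), (2, 3), (3, 0)])

def Spec_solution (n : Int) (edge : List (Int × Int)) (out : Int) : Prop := out = solution_alt n edge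
instance (n : Int) (edge : List (Int × Int)) (out : Int) : Decidable (Spec_solution n edge out) := by
  unfold Spec_solution; infer_instance

-- ===== CLAIM (what is proved, stated in full; the proofs are below) =====
def Claim_equal_solution : Prop := ∀ (n : Int) (edge : List (Int × Int)),
  Dom_solution n edge → Pre_solution n edge → Spec_solution n edge (solution n edge)

-- ===== LEMMAS AND PROOFS =====

-- ---------- proof-internal reference implementation: level-by-level frontier BFS ----------
def buildGraphF (edge : List (Int × Int)) : PySem.Dict Int (List Int) :=
  edge.foldl
    (fun g p =>
      let g1 := g.modify p.1 [] (fun l => l ++ [p.2])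
      g1.modify p.2 [] (fun l => l ++ [p.1]))
    PySem.Dict.empty

def stepF (d : Int) (s : List Int × List Int) (v : Int) : List Int × List Int :=
  if d < PySem.List.pyGetD s.1 v 0 then (PySem.List.pySetD s.1 v d, s.2 ++ [v])
  else s

def levelF (adj : PySem.Dict Int (List Int)) (d : Int) (frontier : List Int)
    (dist : List Int) : List Int × List Int :=
  frontier.foldl (fun s u => (adj.getD u []).foldl (stepF d) s) (dist, [])

def loopF (adj : PySem.Dict Int (List Int)) :
    Nat → List Int → List Int → Int → Int → List Int × Int
  | _, [], dist, far, _ => (dist, far)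
  | 0, _ :: _, dist, far, _ => (dist, far)
  | fuel + 1, u :: f, dist, far, d =>
    let s := levelF adj (d + 1) (u :: f) dist
    loopF adj fuel s.2 s.1 (if s.2.isEmpty then far else d + 1) (d + 1)

def frontierSol (n : Int) (edge : List (Int × Int)) : Int :=
  let graph := buildGraphF edge
  let dist0 := List.replicate (n + 1).toNat (50001 : Int)
  match PySem.List.pySet? dist0 1 0 with
  | none => 0
  | some dist =>
    let r := loopF graph (n.toNat + 2) [1] dist 0 0
    (PySem.List.slice r.1 (some 1) none).foldl (fun c x => if x == r.2 then c + 1 else c) 0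

-- ---------- part 1: A (queue BFS) computes frontierSol (stepwise simulation) ----------

lemma graphs_agree_aux (edge : List (Int × Int)) :
    ∀ (gA gB : PySem.Dict Int (List Int)), (∀ u, gA.getD u [] = gB.getD u []) →
    ∀ u,
    (edge.foldl (fun g p =>
      let g1 := g.insert p.1 (g.getD p.1 [] ++ [p.2])
      g1.insert p.2 (g1.getD p.2 [] ++ [p.1])) gA).getD u []
    = (edge.foldl (fun g p =>
      let g1 := g.modify p.1 [] (fun l => l ++ [p.2])
      g1.modify p.2 [] (fun l => l ++ [p.1])) gB).getD u [] := by
  induction edge with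
  | nil => intro gA gB h u; exact h u
  | cons p rest ih =>
    intro gA gB h u
    simp only [List.foldl_cons]
    apply ih
    intro w
    simp only [PySem.Dict.getD_insert, PySem.Dict.getD_modify]
    split_ifs <;> simp [h]
lemma graphs_agree (edge : List (Int × Int)) (u : Int) :
    (buildGraphA edge).getD u [] = (buildGraphF edge).getD u [] := by
  apply graphs_agree_aux
  intro w
  simp only [PySem.Dict.getD_insert, PySem.Dict.getD_empty]
  split_ifs <;> rfl
def AdjOk (n : Int) (adj : PySem.Dict Int (List Int)) : Prop :=
  ∀ u v, v ∈ adj.getD u [] → 0 ≤ v ∧ v ≤ n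
lemma adjOk_aux (n : Int) (edge : List (Int × Int))
    (h : ∀ p ∈ edge, 0 ≤ p.1 ∧ p.1 ≤ n ∧ 0 ≤ p.2 ∧ p.2 ≤ n) :
    ∀ (g : PySem.Dict Int (List Int)), AdjOk n g →
    AdjOk n (edge.foldl (fun g p =>
      let g1 := g.modify p.1 [] (fun l => l ++ [p.2])
      g1.modify p.2 [] (fun l => l ++ [p.1])) g) := by
  induction edge with
  | nil => intro g hg; exact hg
  | cons p rest ih =>
    intro g hg
    simp only [List.foldl_cons]
    apply ih (fun q hq => h q (List.mem_cons_of_mem _ hq))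
    intro u v hv
    have hp := h p (List.mem_cons_self)
    simp only [PySem.Dict.getD_modify] at hv
    split_ifs at hv
    all_goals try simp only [List.mem_append, List.mem_singleton] at hv
    all_goals first
      | exact hg _ _ hv
      | (have hv' : v ∈ g.getD p.1 [] ∨ v ∈ g.getD p.2 [] ∨ v = p.1 ∨ v = p.2 := by tauto
         rcases hv' with hv' | hv' | hv' | hv'
         · exact hg _ _ hv'
         · exact hg _ _ hv'
         · subst hv'; exact ⟨hp.1, hp.2.1⟩
         · subst hv'; exact ⟨hp.2.2.1, hp.2.2.2⟩)
lemma adjOk_buildGraphF (n : Int) (edge : List (Int × Int))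
    (h : ∀ p ∈ edge, 0 ≤ p.1 ∧ p.1 ≤ n ∧ 0 ≤ p.2 ∧ p.2 ≤ n) :
    AdjOk n (buildGraphF edge) := by
  apply adjOk_aux n edge h
  intro u v hv
  simp [PySem.Dict.getD_empty] at hv
lemma loopA_congr (a1 a2 : PySem.Dict Int (List Int))
    (h : ∀ u, a1.getD u [] = a2.getD u []) :
    ∀ (fuel : Nat) (q dist : List Int) (vis : PySem.Set Int) (far : Int),
    loopA a1 fuel q dist vis far = loopA a2 fuel q dist vis far := by
  intro fuel
  induction fuel with
  | zero => intro q dist vis far; cases q <;> rfl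
  | succ f ih =>
    intro q dist vis far
    cases q with
    | nil => rfl
    | cons cur rest =>
      simp only [loopA, h cur]
      apply ih
def Good (n : Int) (dist : List Int) (l : List Int) (c : Int) : Prop :=
  ∀ u ∈ l, 0 ≤ u ∧ u ≤ n ∧ dist.getD u.toNat 0 = c
def M (d : Int) (dist : List Int) : Nat :=
  ((List.range dist.length).filter (fun j => decide (d < dist.getD j 0))).length
lemma M_drop (n d : Int) (dist acc : List Int) (hnd : acc.Nodup)
    (hacc : Good n dist acc (d + 1)) (hlen : dist.length = (n + 1).toNat) :
    M (d + 1) dist + acc.length ≤ M d dist := by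
  classical
  set A := (List.range dist.length).filter (fun j => decide (d + 1 < dist.getD j 0)) with hA
  set B := (List.range dist.length).filter (fun j => decide (d < dist.getD j 0)) with hB
  set accN := acc.map Int.toNat with haccN
  have hmemacc : ∀ j ∈ accN, j < dist.length ∧ dist.getD j 0 = d + 1 := by
    intro j hj
    rcases List.mem_map.1 hj with ⟨u, hu, rfl⟩
    rcases hacc u hu with ⟨h0, h1, h2⟩
    refine ⟨?_, h2⟩
    omega
  have hndN : accN.Nodup := by
    refine hnd.map_on ?_
    intro x hx y hy hxy
    have := (hacc x hx).1; have := (hacc y hy).1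
    omega
  have hsub : A ++ accN ⊆ B := by
    intro j hj
    rcases List.mem_append.1 hj with hj | hj
    · rw [hA] at hj; rw [hB]
      rcases List.mem_filter.1 hj with ⟨hr, hp⟩
      refine List.mem_filter.2 ⟨hr, ?_⟩
      simp at hp ⊢; omega
    · rcases hmemacc j hj with ⟨h1, h2⟩
      rw [hB]
      refine List.mem_filter.2 ⟨List.mem_range.2 h1, ?_⟩
      simp only [decide_eq_true_eq]
      rw [h2]; omega
  have hndA : (A ++ accN).Nodup := by
    refine List.Nodup.append ?_ hndN ?_
    · exact (List.nodup_range).filter _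
    · intro j hjA hjN
      rcases hmemacc j hjN with ⟨_, h2⟩
      rcases List.mem_filter.1 hjA with ⟨_, hp⟩
      simp only [decide_eq_true_eq] at hp
      rw [h2] at hp; omega
  have := List.Subperm.length_le (List.subperm_of_subset hndA hsub)
  simpa [List.length_append, M, hA, hB, haccN] using this
lemma getD_set_self' (l : List Int) (j : Nat) (v : Int) (h : j < l.length) :
    (l.set j v).getD j 0 = v := by
  simp [List.getD, h]
lemma getD_set_ne' (l : List Int) (i j : Nat) (v : Int) (h : i ≠ j) :
    (l.set j v).getD i 0 = l.getD i 0 := by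
  simp [List.getD, List.getElem?_set_ne (by omega : j ≠ i)]
lemma getD_int (xs : List Int) (v : Int) (h0 : 0 ≤ v) (h1 : v.toNat < xs.length) :
    PySem.List.pyGetD xs v 0 = xs.getD v.toNat 0 := by
  rw [PySem.List.pyGetD_eq_getElem xs 0 h0 (by omega)]
  exact (List.getD_eq_getElem xs 0 h1).symm
lemma M_set (d : Int) (dist : List Int) (j : Nat) (v : Int)
    (hold : d < dist.getD j 0) (hnew : d < v) : M d (dist.set j v) = M d dist := by
  unfold M
  rw [List.length_set]
  congr 1
  apply List.filter_congr
  intro i _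
  by_cases hij : i = j
  · subst hij
    by_cases hjl : i < dist.length
    · rw [getD_set_self' _ _ _ hjl]
      rw [decide_eq_decide]
      omega
    · rw [List.getD_eq_default _ _ (by simpa [List.length_set] using hjl)]
      rw [List.getD_eq_default _ _ (by omega)]
  · rw [getD_set_ne' _ _ _ _ hij]
def VisInv (n d : Int) (dist : List Int) (vis : List Int) : Prop :=
  ∀ u ∈ vis, 0 ≤ u ∧ u ≤ n ∧ dist.getD u.toNat 0 ≤ d
lemma inner (n d : Int) (vis : PySem.Set Int) (u : Int)
    (l : List Int) (hl : ∀ v ∈ l, 0 ≤ v ∧ v ≤ n) :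
    ∀ (dist acc q0 : List Int) (far0 : Int),
    dist.length = (n + 1).toNat → 0 ≤ d → far0 ≤ d →
    (0 ≤ u ∧ u ≤ n ∧ dist.getD u.toNat 0 = d) →
    acc.Nodup → Good n dist acc (d + 1) → VisInv n d dist vis →
    (l.foldl (stepA vis u) (dist, q0 ++ acc, if acc.isEmpty then far0 else d + 1) =
      ((l.foldl (stepF (d + 1)) (dist, acc)).1,
       q0 ++ (l.foldl (stepF (d + 1)) (dist, acc)).2,
       if (l.foldl (stepF (d + 1)) (dist, acc)).2.isEmpty then far0 else d + 1)) ∧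
    (l.foldl (stepF (d + 1)) (dist, acc)).1.length = (n + 1).toNat ∧
    (l.foldl (stepF (d + 1)) (dist, acc)).2.Nodup ∧
    Good n (l.foldl (stepF (d + 1)) (dist, acc)).1 (l.foldl (stepF (d + 1)) (dist, acc)).2 (d + 1) ∧
    VisInv n d (l.foldl (stepF (d + 1)) (dist, acc)).1 vis ∧
    (∀ j : Nat, dist.getD j 0 ≤ d → (l.foldl (stepF (d + 1)) (dist, acc)).1.getD j 0 = dist.getD j 0) ∧
    M d (l.foldl (stepF (d + 1)) (dist, acc)).1 = M d dist := by
  induction l with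
  | nil =>
    intro dist acc q0 far0 hlen hd hfar0 hu hnd hacc hvis
    exact ⟨rfl, hlen, hnd, hacc, hvis, fun j _ => rfl, rfl⟩
  | cons v l ih =>
    intro dist acc q0 far0 hlen hd hfar0 hu hnd hacc hvis
    have hv := hl v List.mem_cons_self
    have hlv : ∀ w ∈ l, 0 ≤ w ∧ w ≤ n := fun w hw => hl w (List.mem_cons_of_mem _ hw)
    have hn0 : 0 ≤ n := le_trans hu.1 hu.2.1
    have hvlt : v.toNat < dist.length := by rw [hlen]; omega
    have hult : u.toNat < dist.length := by rw [hlen]; omega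
    simp only [List.foldl_cons]
    by_cases hc : PySem.Set.contains vis v = true
    · -- v already visited: A skips; F skips too since dist[v] ≤ d < d+1
      have hvmem : v ∈ vis := (PySem.Set.contains_iff vis v).1 hc
      have hvv := hvis v hvmem
      have hA : stepA vis u (dist, q0 ++ acc, if acc.isEmpty then far0 else d + 1) v =
          (dist, q0 ++ acc, if acc.isEmpty then far0 else d + 1) := by
        unfold stepA; rw [if_pos hc]
      have hB : stepF (d + 1) (dist, acc) v = (dist, acc) := by
        unfold stepF
        rw [getD_int dist v hv.1 hvlt, if_neg (by omega)]
      simp only [hA, hB]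
      exact ih hlv dist acc q0 far0 hlen hd hfar0 hu hnd hacc hvis
    · have hdcu : PySem.List.pyGetD dist u 0 = d := by
        rw [getD_int dist u hu.1 hult]; exact hu.2.2
      by_cases hlt : d + 1 < dist.getD v.toNat 0
      · -- both relax v
        have hA : stepA vis u (dist, q0 ++ acc, if acc.isEmpty then far0 else d + 1) v =
            (dist.set v.toNat (d + 1), q0 ++ (acc ++ [v]), d + 1) := by
          unfold stepA
          rw [if_neg hc]
          simp only [hdcu]
          rw [getD_int dist v hv.1 hvlt, if_pos hlt,
              PySem.List.pySetD_of_nonneg dist (d + 1) hv.1]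
          have hmax : max (if acc.isEmpty = true then far0 else d + 1) (d + 1) = d + 1 := by
            by_cases hacc0 : acc.isEmpty = true
            · rw [if_pos hacc0]; exact max_eq_right (by omega)
            · rw [if_neg hacc0]; exact max_eq_right le_rfl
          rw [hmax, List.append_assoc]
        have hB : stepF (d + 1) (dist, acc) v = (dist.set v.toNat (d + 1), acc ++ [v]) := by
          unfold stepF
          rw [getD_int dist v hv.1 hvlt, if_pos hlt,
              PySem.List.pySetD_of_nonneg dist (d + 1) hv.1]
        simp only [hA, hB]
        have hvnacc : v ∉ acc := by
          intro hmem
          have := (hacc v hmem).2.2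
          omega
        have hgood' : Good n (dist.set v.toNat (d + 1)) (acc ++ [v]) (d + 1) := by
          intro w hw
          rcases List.mem_append.1 hw with hw | hw
          · rcases hacc w hw with ⟨w0, w1, w2⟩
            refine ⟨w0, w1, ?_⟩
            rw [getD_set_ne' _ _ _ _ (by intro he; rw [he] at w2; omega)]
            exact w2
          · simp at hw; subst hw
            exact ⟨hv.1, hv.2, getD_set_self' _ _ _ hvlt⟩
        have hvis' : VisInv n d (dist.set v.toNat (d + 1)) vis := by
          intro w hw
          rcases hvis w hw with ⟨w0, w1, w2⟩
          refine ⟨w0, w1, ?_⟩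
          rw [getD_set_ne' _ _ _ _ (by intro he; rw [he] at w2; omega)]
          exact w2
        have hu' : 0 ≤ u ∧ u ≤ n ∧ (dist.set v.toNat (d + 1)).getD u.toNat 0 = d := by
          refine ⟨hu.1, hu.2.1, ?_⟩
          rw [getD_set_ne' _ _ _ _ (by intro he; rw [he] at hu; omega)]
          exact hu.2.2
        have ihr := ih hlv (dist.set v.toNat (d + 1)) (acc ++ [v]) q0 far0
          (by rw [List.length_set]; exact hlen) hd hfar0 hu'
          (by simp [List.nodup_append, hnd]; intro a ha he; exact hvnacc (he ▸ ha))
          hgood' hvis'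
        have heq : (if (acc ++ [v]).isEmpty then far0 else d + 1) = d + 1 := by simp
        rw [heq] at ihr
        refine ⟨ihr.1, ihr.2.1, ihr.2.2.1, ihr.2.2.2.1, ihr.2.2.2.2.1, ?_, ?_⟩
        · intro j hj
          have hjne : j ≠ v.toNat := by intro he; rw [he] at hj; omega
          rw [ihr.2.2.2.2.2.1 j (by rw [getD_set_ne' _ _ _ _ hjne]; exact hj),
              getD_set_ne' _ _ _ _ hjne]
        · rw [ihr.2.2.2.2.2.2, M_set d dist v.toNat (d + 1) (by omega) (by omega)]
      · -- both skip
        have hA : stepA vis u (dist, q0 ++ acc, if acc.isEmpty then far0 else d + 1) v =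
            (dist, q0 ++ acc, if acc.isEmpty then far0 else d + 1) := by
          unfold stepA
          rw [if_neg hc]
          simp only [hdcu]
          rw [getD_int dist v hv.1 hvlt, if_neg hlt]
        have hB : stepF (d + 1) (dist, acc) v = (dist, acc) := by
          unfold stepF
          rw [getD_int dist v hv.1 hvlt, if_neg hlt]
        simp only [hA, hB]
        exact ih hlv dist acc q0 far0 hlen hd hfar0 hu hnd hacc hvis
def contLvl (adj : PySem.Dict Int (List Int)) (d : Int) (rest : List Int)
    (s : List Int × List Int) : List Int × List Int :=
  rest.foldl (fun s u => (adj.getD u []).foldl (stepF d) s) s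
lemma procRest (n d : Int) (adj : PySem.Dict Int (List Int)) (hadj : AdjOk n adj) :
    ∀ (rest : List Int) (fA : Nat) (dist acc : List Int) (vis : PySem.Set Int) (far0 : Int),
    dist.length = (n + 1).toNat → 0 ≤ d → far0 ≤ d →
    Good n dist rest d → acc.Nodup → Good n dist acc (d + 1) → VisInv n d dist vis →
    rest.length ≤ fA →
    (loopA adj fA (rest ++ acc) dist vis (if acc.isEmpty then far0 else d + 1) =
      loopA adj (fA - rest.length) (contLvl adj (d + 1) rest (dist, acc)).2
        (contLvl adj (d + 1) rest (dist, acc)).1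
        (rest.foldl (fun v u => PySem.Set.add v u) vis)
        (if (contLvl adj (d + 1) rest (dist, acc)).2.isEmpty then far0 else d + 1)) ∧
    (contLvl adj (d + 1) rest (dist, acc)).1.length = (n + 1).toNat ∧
    (contLvl adj (d + 1) rest (dist, acc)).2.Nodup ∧
    Good n (contLvl adj (d + 1) rest (dist, acc)).1 (contLvl adj (d + 1) rest (dist, acc)).2 (d + 1) ∧
    VisInv n d (contLvl adj (d + 1) rest (dist, acc)).1
      (rest.foldl (fun v u => PySem.Set.add v u) vis) ∧
    M d (contLvl adj (d + 1) rest (dist, acc)).1 = M d dist := by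
  intro rest
  induction rest with
  | nil =>
    intro fA dist acc vis far0 hlen hd hfar0 hrest hnd hacc hvis hfA
    exact ⟨rfl, hlen, hnd, hacc, hvis, rfl⟩
  | cons u rest' ih =>
    intro fA dist acc vis far0 hlen hd hfar0 hrest hnd hacc hvis hfA
    have hu := hrest u List.mem_cons_self
    have hrest' : Good n dist rest' d := fun w hw => hrest w (List.mem_cons_of_mem _ hw)
    cases fA with
    | zero => simp at hfA
    | succ fA' =>
      have hinner := inner n d vis u (adj.getD u []) (fun v hv => hadj u v hv)
        dist acc rest' far0 hlen hd hfar0 hu hnd hacc hvis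
      set sB := (adj.getD u []).foldl (stepF (d + 1)) (dist, acc) with hsB
      have hstepA : loopA adj (fA' + 1) ((u :: rest') ++ acc) dist vis
          (if acc.isEmpty then far0 else d + 1) =
          loopA adj fA' (rest' ++ sB.2) sB.1 (PySem.Set.add vis u)
          (if sB.2.isEmpty then far0 else d + 1) := by
        simp only [List.cons_append, loopA]
        rw [hinner.1]
      have hGr' : Good n sB.1 rest' d := by
        intro w hw
        rcases hrest' w hw with ⟨w0, w1, w2⟩
        exact ⟨w0, w1, (hinner.2.2.2.2.2.1 w.toNat (le_of_eq w2)).trans w2⟩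
      have hvis' : VisInv n d sB.1 (PySem.Set.add vis u) := by
        intro w hw
        rcases (PySem.Set.mem_add vis u w).1 hw with hw | hw
        · exact hinner.2.2.2.2.1 w hw
        · subst hw
          refine ⟨hu.1, hu.2.1, ?_⟩
          rw [hinner.2.2.2.2.2.1 _ (le_of_eq hu.2.2)]
          exact le_of_eq hu.2.2
      have ihr := ih fA' sB.1 sB.2 (PySem.Set.add vis u) far0 hinner.2.1 hd hfar0
        hGr' hinner.2.2.1 hinner.2.2.2.1 hvis' (by simpa using hfA)
      have hcont : contLvl adj (d + 1) (u :: rest') (dist, acc) =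
          contLvl adj (d + 1) rest' sB := rfl
      have hfold : (u :: rest').foldl (fun v u => PySem.Set.add v u) vis =
          rest'.foldl (fun v u => PySem.Set.add v u) (PySem.Set.add vis u) := by
        simp only [List.foldl_cons]
      have hsub : fA' + 1 - (u :: rest').length = fA' - rest'.length := by
        simp only [List.length_cons]; omega
      rw [hcont, hfold, hsub, hstepA]
      exact ⟨ihr.1, ihr.2.1, ihr.2.2.1, ihr.2.2.2.1, ihr.2.2.2.2.1,
        by rw [ihr.2.2.2.2.2, hinner.2.2.2.2.2.2]⟩
lemma main_sim (n : Int) (adj : PySem.Dict Int (List Int)) (hadj : AdjOk n adj) :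
    ∀ (fB fA : Nat) (rest acc dist : List Int) (vis : PySem.Set Int) (far0 d : Int),
    dist.length = (n + 1).toNat → 0 ≤ d → far0 ≤ d →
    Good n dist rest d → acc.Nodup → Good n dist acc (d + 1) → VisInv n d dist vis →
    rest.length + M d dist ≤ fA → M d dist < fB →
    loopA adj fA (rest ++ acc) dist vis (if acc.isEmpty then far0 else d + 1) =
      loopF adj fB (contLvl adj (d + 1) rest (dist, acc)).2
        (contLvl adj (d + 1) rest (dist, acc)).1
        (if (contLvl adj (d + 1) rest (dist, acc)).2.isEmpty then far0 else d + 1) (d + 1) := by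
  intro fB
  induction fB with
  | zero => intro fA rest acc dist vis far0 d _ _ _ _ _ _ _ _ hfB; omega
  | succ fB' ih =>
    intro fA rest acc dist vis far0 d hlen hd hfar0 hrest hnd hacc hvis hfA hfB
    have pr := procRest n d adj hadj rest fA dist acc vis far0 hlen hd hfar0 hrest hnd hacc hvis
      (by omega)
    rw [pr.1]
    set s := contLvl adj (d + 1) rest (dist, acc) with hs
    set vis' := rest.foldl (fun v u => PySem.Set.add v u) vis with hvis'
    rcases hsnil : s.2 with _ | ⟨w, ws⟩
    · cases hfuel : fA - rest.length <;> simp [loopA, loopF]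
    · have hMdrop := M_drop n d s.1 s.2 pr.2.2.1 pr.2.2.2.1 pr.2.1
      have hM : M d s.1 = M d dist := pr.2.2.2.2.2
      have hlen2 : s.2.length ≥ 1 := by rw [hsnil]; simp
      have ihr := ih (fA - rest.length) s.2 [] s.1 vis' (d + 1) (d + 1)
        pr.2.1 (by omega) le_rfl pr.2.2.2.1 List.nodup_nil (by intro w hw; cases hw)
        (by intro w hw; rcases pr.2.2.2.2.1 w hw with ⟨w0, w1, w2⟩; exact ⟨w0, w1, by omega⟩)
        (by omega) (by omega)
      simp only [List.append_nil, List.isEmpty_nil, reduceIte] at ihr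
      simp only [List.isEmpty_cons, Bool.false_eq_true, if_false]
      rw [hsnil] at ihr
      rw [ihr]
      simp only [loopF, levelF]
      rfl
theorem final_inrange (n : Int) (edge : List (Int × Int))
    (hpre : 1 ≤ n ∧ ∀ p ∈ edge, 0 ≤ p.1 ∧ p.1 ≤ n ∧ 0 ≤ p.2 ∧ p.2 ≤ n) :
    solution n edge = frontierSol n edge := by
  obtain ⟨hn, hedge⟩ := hpre
  have hL : (n + 1).toNat = n.toNat + 1 := by omega
  have hdist0 : (PySem.List.pyRange 0 (n + 1) 1).map (fun _ => (50001 : Int)) =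
      List.replicate (n + 1).toNat (50001 : Int) := by
    rw [PySem.List.pyRange_one, List.map_map]
    simp only [Function.comp_def]
    rw [List.map_const']
    simp
  have h1L : 1 < (n + 1).toNat := by omega
  have hset : PySem.List.pySet? (List.replicate (n + 1).toNat (50001 : Int)) 1 0 =
      some ((List.replicate (n + 1).toNat (50001 : Int)).set 1 0) := by
    have := PySem.List.pySet? (List.replicate (n + 1).toNat (50001 : Int)) (1 : Nat) (0 : Int)
    rw [show (1 : Int) = ((1 : Nat) : Int) by simp]
    exact PySem.List.pySet?_natCast _ 1 0 (by simpa using h1L)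
  set dist := (List.replicate (n + 1).toNat (50001 : Int)).set 1 0 with hdist
  have hlen : dist.length = (n + 1).toNat := by simp [hdist]
  set adjB := buildGraphF edge with hadjB
  have hadj : AdjOk n adjB := adjOk_buildGraphF n edge hedge
  have hcongr : ∀ fuel q dist vis far,
      loopA (buildGraphA edge) fuel q dist vis far = loopA adjB fuel q dist vis far :=
    loopA_congr _ _ (fun u => graphs_agree edge u)
  have hgood1 : Good n dist [1] 0 := by
    intro u hu
    simp only [List.mem_singleton] at hu
    subst hu
    refine ⟨by omega, hn, ?_⟩
    have ht : Int.toNat 1 = 1 := rfl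
    rw [hdist, ht, getD_set_self' _ _ _ (by simp; omega)]
  have hMlt : M 0 dist < (n + 1).toNat := by
    have : ((List.range dist.length).filter (fun j => decide ((0:Int) < dist.getD j 0))).length <
        (List.range dist.length).length := by
      rw [List.length_filter_lt_length_iff_exists]
      refine ⟨1, by simp [hlen]; omega, ?_⟩
      rw [hdist, getD_set_self' _ _ _ (by simp; omega)]
      simp
    simpa [M, hlen] using this
  have hsim := main_sim n adjB hadj (n.toNat + 1) (n.toNat + 2) [1] [] dist
    PySem.Set.empty 0 0 hlen le_rfl le_rfl hgood1 List.nodup_nil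
    (by intro u hu; cases hu) (by intro u hu; cases hu)
    (by simp; omega) (by omega)
  simp only [List.append_nil, List.isEmpty_nil, reduceIte, zero_add] at hsim
  simp only [solution, frontierSol, hdist0, hset]
  rw [hcongr]
  have hstepB0 : loopF adjB (n.toNat + 2) [1] dist 0 0 =
      loopF adjB (n.toNat + 1) (contLvl adjB 1 [1] (dist, [])).2
        (contLvl adjB 1 [1] (dist, [])).1
        (if (contLvl adjB 1 [1] (dist, [])).2.isEmpty then 0 else 1) 1 := by
    show loopF adjB ((n.toNat + 1) + 1) [1] dist 0 0 = _
    simp only [loopF, levelF]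
    rfl
  rw [hstepB0, ← hsim]
  set r := loopA adjB (n.toNat + 2) [1] dist PySem.Set.empty 0 with hr
  rw [PySem.List.foldl_count_if (fun x => x == r.2) (PySem.List.slice r.1 (some 1) none) 0]
  simp [List.countP_eq_length_filter]

-- when node 1 is not an endpoint, its adjacency lists are empty
lemma getD_one_buildGraphF (edge : List (Int × Int))
    (h : ∀ p ∈ edge, p.1 ≠ 1 ∧ p.2 ≠ 1) : (buildGraphF edge).getD 1 [] = [] := by
  suffices haux : ∀ g : PySem.Dict Int (List Int), g.getD 1 [] = [] →
      (edge.foldl (fun g p =>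
        let g1 := g.modify p.1 [] (fun l => l ++ [p.2])
        g1.modify p.2 [] (fun l => l ++ [p.1])) g).getD 1 [] = [] by
    exact haux PySem.Dict.empty (by simp [PySem.Dict.getD_empty])
  induction edge with
  | nil => intro g hg; exact hg
  | cons p rest ih =>
    intro g hg
    have hp := h p List.mem_cons_self
    simp only [List.foldl_cons]
    refine ih (fun q hq => h q (List.mem_cons_of_mem _ hq)) _ ?_
    simp only [PySem.Dict.getD_modify, if_neg (Ne.symm hp.1), if_neg (Ne.symm hp.2)]
    exact hg

theorem solutionA_no1 (n : Int) (edge : List (Int × Int)) (hn : 1 ≤ n)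
    (h1 : ∀ p ∈ edge, p.1 ≠ 1 ∧ p.2 ≠ 1) :
    solution n edge = 1 := by
  have hB1 : (buildGraphF edge).getD 1 [] = [] := getD_one_buildGraphF edge h1
  have hA1 : (buildGraphA edge).getD 1 [] = [] := by rw [graphs_agree edge 1]; exact hB1
  have hdist0 : (PySem.List.pyRange 0 (n + 1) 1).map (fun _ => (50001 : Int)) =
      List.replicate (n + 1).toNat (50001 : Int) := by
    rw [PySem.List.pyRange_one, List.map_map]
    simp only [Function.comp_def]
    rw [List.map_const']
    simp
  have h1L : 1 < (n + 1).toNat := by omega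
  have hset : PySem.List.pySet? (List.replicate (n + 1).toNat (50001 : Int)) 1 0 =
      some ((List.replicate (n + 1).toNat (50001 : Int)).set 1 0) := by
    rw [show (1 : Int) = ((1 : Nat) : Int) by simp]
    exact PySem.List.pySet?_natCast _ 1 0 (by simpa using h1L)
  set dist := (List.replicate (n + 1).toNat (50001 : Int)).set 1 0 with hdist
  obtain ⟨k, hk⟩ : ∃ k, (n + 1).toNat = k + 2 := ⟨n.toNat - 1, by omega⟩
  have hdist' : dist = 50001 :: 0 :: List.replicate k 50001 := by
    rw [hdist, hk]
    simp [List.replicate_succ]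
  have hrA : loopA (buildGraphA edge) (n.toNat + 2) [1] dist PySem.Set.empty 0 = (dist, 0) := by
    show loopA _ ((n.toNat + 1) + 1) [1] dist PySem.Set.empty 0 = _
    simp only [loopA, hA1, List.foldl_nil]
  simp only [solution, hdist0, hset, hrA]
  have hslice : PySem.List.slice dist (some 1) none = 0 :: List.replicate k 50001 := by
    rw [PySem.List.slice_from dist (by omega : (0:Int) ≤ 1), hdist']
    rfl
  rw [hslice]
  simp


-- ---------- part 2: reachability levels (shared spec of both algorithms) ----------
def adjb (edge : List (Int × Int)) (u v : Int) : Bool :=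
  edge.any (fun p => (p.1 == u && p.2 == v) || (p.1 == v && p.2 == u))

def cands (edge : List (Int × Int)) : List Int :=
  1 :: edge.flatMap (fun p => [p.1, p.2])

-- Rb edge k v: v is reachable from node 1 in at most k steps
def Rb (edge : List (Int × Int)) : Nat → Int → Bool
  | 0, v => v == 1
  | k + 1, v => Rb edge k v || (cands edge).any (fun u => Rb edge k u && adjb edge u v)

lemma adjb_symm (edge : List (Int × Int)) (u v : Int) : adjb edge u v = adjb edge v u := by
  induction edge with
  | nil => rfl
  | cons p t ih =>
    simp only [adjb, List.any_cons] at ih ⊢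
    rw [ih]
    cases h1 : (p.1 == u && p.2 == v) <;> cases h2 : (p.1 == v && p.2 == u) <;> simp [h1, h2]

lemma adjb_mem_right (edge : List (Int × Int)) (u v : Int) (h : adjb edge u v = true) :
    v ∈ cands edge := by
  unfold adjb at h
  rcases List.any_eq_true.1 h with ⟨p, hp, hc⟩
  simp only [Bool.or_eq_true, Bool.and_eq_true, beq_iff_eq] at hc
  unfold cands
  rcases hc with ⟨_, h2⟩ | ⟨h1, _⟩
  · exact List.mem_cons_of_mem _ (List.mem_flatMap.2 ⟨p, hp, by simp [h2]⟩)
  · exact List.mem_cons_of_mem _ (List.mem_flatMap.2 ⟨p, hp, by simp [h1]⟩)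

lemma Rb_mem_cands (edge : List (Int × Int)) :
    ∀ k v, Rb edge k v = true → v ∈ cands edge := by
  intro k
  induction k with
  | zero =>
    intro v h
    simp only [Rb, beq_iff_eq] at h
    subst h
    exact List.mem_cons_self
  | succ k ih =>
    intro v h
    simp only [Rb, Bool.or_eq_true] at h
    rcases h with h | h
    · exact ih v h
    · rcases List.any_eq_true.1 h with ⟨u, _, hc⟩
      simp only [Bool.and_eq_true] at hc
      exact adjb_mem_right edge u v hc.2

lemma Rb_succ_iff (edge : List (Int × Int)) (k : Nat) (v : Int) :
    Rb edge (k + 1) v = true ↔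
      Rb edge k v = true ∨ ∃ u, Rb edge k u = true ∧ adjb edge u v = true := by
  simp only [Rb, Bool.or_eq_true, List.any_eq_true, Bool.and_eq_true]
  constructor
  · rintro (h | ⟨u, _, hu, hadj⟩)
    · exact Or.inl h
    · exact Or.inr ⟨u, hu, hadj⟩
  · rintro (h | ⟨u, hu, hadj⟩)
    · exact Or.inl h
    · exact Or.inr ⟨u, Rb_mem_cands edge k u hu, hu, hadj⟩

lemma Rb_mono (edge : List (Int × Int)) {k m : Nat} (h : k ≤ m) {v : Int}
    (hv : Rb edge k v = true) : Rb edge m v = true := by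
  induction m with
  | zero =>
    have : k = 0 := by omega
    subst this; exact hv
  | succ m ih =>
    rcases Nat.lt_or_ge k (m + 1) with hlt | hge
    · exact (Rb_succ_iff edge m v).2 (Or.inl (ih (by omega)))
    · have : k = m + 1 := by omega
      subst this; exact hv

-- level of v: least k ≤ 50000 with Rb k v, else 50001 (= unreached within the cap)
def lvl (edge : List (Int × Int)) (v : Int) : Nat :=
  match (List.range 50001).find? (fun k => Rb edge k v) with
  | some k => k
  | none => 50001

lemma lvl_eq_of_some (edge : List (Int × Int)) (v : Int) (k : Nat)
    (hf : (List.range 50001).find? (fun k => Rb edge k v) = some k) : lvl edge v = k := by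
  unfold lvl; rw [hf]

lemma lvl_eq_of_none (edge : List (Int × Int)) (v : Int)
    (hf : (List.range 50001).find? (fun k => Rb edge k v) = none) : lvl edge v = 50001 := by
  unfold lvl; rw [hf]

lemma lvl_le_cap (edge : List (Int × Int)) (v : Int) : lvl edge v ≤ 50001 := by
  cases hf : (List.range 50001).find? (fun k => Rb edge k v) with
  | none => rw [lvl_eq_of_none edge v hf]
  | some k =>
    have hk := List.mem_range.1 (List.mem_of_find?_eq_some hf)
    rw [lvl_eq_of_some edge v k hf]
    omega

lemma lvl_spec_Rb (edge : List (Int × Int)) (v : Int) (h : lvl edge v ≤ 50000) :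
    Rb edge (lvl edge v) v = true := by
  cases hf : (List.range 50001).find? (fun k => Rb edge k v) with
  | none => rw [lvl_eq_of_none edge v hf] at h; omega
  | some k =>
    rw [lvl_eq_of_some edge v k hf]
    simpa using List.find?_some hf

lemma lvl_min (edge : List (Int × Int)) (v : Int) :
    ∀ j < lvl edge v, Rb edge j v = false := by
  intro j hj
  cases hf : (List.range 50001).find? (fun k => Rb edge k v) with
  | none =>
    rw [lvl_eq_of_none edge v hf] at hj
    by_contra hc
    have : Rb edge j v = true := by revert hc; cases Rb edge j v <;> simp
    have := List.find?_eq_none.1 hf j (List.mem_range.2 (by omega))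
    simp_all
  | some k =>
    rw [lvl_eq_of_some edge v k hf] at hj
    have hjk : j < k := hj
    by_contra hc
    have hjt : Rb edge j v = true := by revert hc; cases Rb edge j v <;> simp
    have hk := List.mem_range.1 (List.mem_of_find?_eq_some hf)
    have hrange : List.range 50001 = List.range (j+1) ++ List.range' (j+1) (50001 - (j+1)) := by
      have h2 := @List.range'_append 0 (j+1) (50001-(j+1)) 1
      norm_num at h2
      rw [show j + 1 + (50001 - (j + 1)) = 50001 from by omega] at h2
      rw [List.range_eq_range', List.range_eq_range']
      exact h2.symm
    rw [hrange, List.find?_append] at hf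
    cases hf1 : (List.range (j+1)).find? (fun k => Rb edge k v) with
    | none =>
      have := List.find?_eq_none.1 hf1 j (List.mem_range.2 (by omega))
      exact this hjt
    | some x =>
      rw [hf1] at hf
      rw [Option.some_or] at hf
      have hx := List.mem_range.1 (List.mem_of_find?_eq_some hf1)
      have : x = k := by injection hf
      omega

lemma lvl_le_of_Rb (edge : List (Int × Int)) (v : Int) (k : Nat) (hk : k ≤ 50000)
    (h : Rb edge k v = true) : lvl edge v ≤ k := by
  by_contra hc
  have := lvl_min edge v k (by omega)
  simp_all

lemma lvl_one (edge : List (Int × Int)) : lvl edge 1 = 0 := by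
  have : Rb edge 0 1 = true := by simp [Rb]
  have h := lvl_le_of_Rb edge 1 0 (by omega) this
  omega

lemma lvl_zero_iff (edge : List (Int × Int)) (v : Int) : lvl edge v = 0 ↔ v = 1 := by
  constructor
  · intro h
    have := lvl_spec_Rb edge v (by omega)
    rw [h] at this
    simpa [Rb] using this
  · intro h; subst h; exact lvl_one edge

-- a node at level k+1 has a neighbour at level k
lemma lvl_pred (edge : List (Int × Int)) (v : Int) (k : Nat) (hk : k + 1 ≤ 50000)
    (h : lvl edge v = k + 1) :
    ∃ u, lvl edge u = k ∧ adjb edge u v = true := by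
  have hRb : Rb edge (k + 1) v = true := by rw [← h]; exact lvl_spec_Rb edge v (by omega)
  have hnRb : Rb edge k v = false := lvl_min edge v k (by omega)
  rcases (Rb_succ_iff edge k v).1 hRb with hc | ⟨u, hu, hadj⟩
  · simp_all
  · refine ⟨u, ?_, hadj⟩
    have hle : lvl edge u ≤ k := lvl_le_of_Rb edge u k (by omega) hu
    rcases Nat.lt_or_ge (lvl edge u) k with hlt | hge
    · exfalso
      have : Rb edge k v = true := by
        have h1 : Rb edge (lvl edge u + 1) v = true :=
          (Rb_succ_iff edge (lvl edge u) v).2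
            (Or.inr ⟨u, lvl_spec_Rb edge u (by omega), hadj⟩)
        exact Rb_mono edge (by omega) h1
      simp_all
    · omega

-- every level below an inhabited one is inhabited
lemma lvl_descend (edge : List (Int × Int)) :
    ∀ k v, lvl edge v = k → k ≤ 50000 → ∀ j ≤ k, ∃ w, lvl edge w = j := by
  intro k
  induction k with
  | zero =>
    intro v hv _ j hj
    interval_cases j
    exact ⟨v, hv⟩
  | succ k ih =>
    intro v hv hk j hj
    rcases Nat.lt_or_ge j (k + 1) with hlt | hge
    · rcases lvl_pred edge v k hk hv with ⟨u, hu, _⟩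
      exact ih u hu (by omega) j (by omega)
    · have : j = k + 1 := by omega
      subst this; exact ⟨v, hv⟩

-- largest inhabited level within the cap
def farF (edge : List (Int × Int)) : Nat :=
  (cands edge).foldl (fun m v => if lvl edge v ≤ 50000 then max m (lvl edge v) else m) 0

lemma farF_le (edge : List (Int × Int)) : farF edge ≤ 50000 := by
  unfold farF
  have : ∀ (l : List Int) (m : Nat), m ≤ 50000 →
      l.foldl (fun m v => if lvl edge v ≤ 50000 then max m (lvl edge v) else m) m ≤ 50000 := by
    intro l
    induction l with
    | nil => intro m hm; exact hm
    | cons v t ih =>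
      intro m hm
      simp only [List.foldl_cons]
      split_ifs with h
      · exact ih _ (by omega)
      · exact ih _ hm
  exact this _ 0 (by omega)

lemma farF_ge (edge : List (Int × Int)) (v : Int) (h : lvl edge v ≤ 50000) :
    lvl edge v ≤ farF edge := by
  have hv : v ∈ cands edge := Rb_mem_cands edge _ v (lvl_spec_Rb edge v h)
  unfold farF
  have step : ∀ (l : List Int) (m : Nat), v ∈ l →
      lvl edge v ≤ l.foldl (fun m v => if lvl edge v ≤ 50000 then max m (lvl edge v) else m) m := by
    intro l
    induction l with
    | nil => intro m hm; cases hm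
    | cons w t ih =>
      intro m hm
      simp only [List.foldl_cons]
      rcases List.mem_cons.1 hm with rfl | hm
      · rw [if_pos h]
        have mono : ∀ (l : List Int) (a b : Nat), a ≤ b →
            a ≤ l.foldl (fun m v => if lvl edge v ≤ 50000 then max m (lvl edge v) else m) b := by
          intro l
          induction l with
          | nil => intro a b hab; simpa using hab
          | cons x s ihx =>
            intro a b hab
            simp only [List.foldl_cons]
            split_ifs
            · exact ihx a _ (le_trans hab (Nat.le_max_left _ _))
            · exact ihx a _ hab
        exact mono t _ _ (Nat.le_max_right _ _)
      · exact ih _ hm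
  exact step _ 0 hv

lemma farF_inhabited (edge : List (Int × Int)) : ∃ v, lvl edge v = farF edge := by
  unfold farF
  have step : ∀ (l : List Int) (m : Nat), (∃ v, lvl edge v = m) → m ≤ 50000 →
      ∃ v, lvl edge v =
        l.foldl (fun m v => if lvl edge v ≤ 50000 then max m (lvl edge v) else m) m := by
    intro l
    induction l with
    | nil => intro m hm _; exact hm
    | cons w t ih =>
      intro m hm hcap
      simp only [List.foldl_cons]
      split_ifs with h
      · rcases Nat.le_total m (lvl edge w) with hle | hle
        · exact ih _ ⟨w, by omega⟩ (by omega)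
        · have hmx : max m (lvl edge w) = m := Nat.max_eq_left hle
          rw [hmx]
          exact ih _ hm hcap
      · exact ih _ hm hcap
  exact step _ 0 ⟨1, lvl_one edge⟩ (by omega)

-- ---------- part 3: the frontier BFS computes the level function ----------
def DVal (edge : List (Int × Int)) (d : Nat) (j : Nat) : Int :=
  if lvl edge (j : Int) ≤ d then (lvl edge (j : Int) : Int) else 50001

def DistOK (n : Int) (edge : List (Int × Int)) (d : Nat) (dist : List Int) : Prop :=
  dist.length = (n + 1).toNat ∧ ∀ j : Nat, j < (n + 1).toNat → dist.getD j 0 = DVal edge d j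

def FrontOK (edge : List (Int × Int)) (d : Nat) (F : List Int) : Prop :=
  F.Nodup ∧ ∀ v, v ∈ F ↔ lvl edge v = d

def InvS (n : Int) (edge : List (Int × Int)) (d : Nat) (s : List Int × List Int) : Prop :=
  s.2.Nodup ∧ (∀ v ∈ s.2, lvl edge v = d + 1) ∧ s.1.length = (n + 1).toNat ∧
  ∀ j : Nat, j < (n + 1).toNat →
    s.1.getD j 0 = if ((j : Int) ∈ s.2) then ((d : Int) + 1) else DVal edge d j

lemma cands_range (n : Int) (edge : List (Int × Int)) (hn : 1 ≤ n)
    (he : ∀ p ∈ edge, 0 ≤ p.1 ∧ p.1 ≤ n ∧ 0 ≤ p.2 ∧ p.2 ≤ n) :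
    ∀ v ∈ cands edge, 0 ≤ v ∧ v ≤ n := by
  intro v hv
  unfold cands at hv
  rcases List.mem_cons.1 hv with rfl | hv
  · omega
  · rcases List.mem_flatMap.1 hv with ⟨p, hp, hm⟩
    have := he p hp
    simp only [List.mem_cons, List.mem_singleton] at hm
    rcases hm with rfl | hm
    · omega
    · simp at hm; subst hm; omega

lemma lvl_range (n : Int) (edge : List (Int × Int)) (hn : 1 ≤ n)
    (he : ∀ p ∈ edge, 0 ≤ p.1 ∧ p.1 ≤ n ∧ 0 ≤ p.2 ∧ p.2 ≤ n)
    (v : Int) (h : lvl edge v ≤ 50000) : 0 ≤ v ∧ v ≤ n :=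
  cands_range n edge hn he v (Rb_mem_cands edge _ v (lvl_spec_Rb edge v h))

lemma innerF (n : Int) (edge : List (Int × Int)) (d : Nat) (u : Int)
    (hn : 1 ≤ n) (he : ∀ p ∈ edge, 0 ≤ p.1 ∧ p.1 ≤ n ∧ 0 ≤ p.2 ∧ p.2 ≤ n)
    (hcap : d + 1 ≤ 50000) (hu : lvl edge u = d) :
    ∀ (l : List Int), (∀ v ∈ l, adjb edge u v = true) →
    ∀ s, InvS n edge d s →
      InvS n edge d (l.foldl (stepF ((d : Int) + 1)) s) ∧
      (∀ x ∈ s.2, x ∈ (l.foldl (stepF ((d : Int) + 1)) s).2) ∧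
      (∀ v ∈ l, lvl edge v = d + 1 → v ∈ (l.foldl (stepF ((d : Int) + 1)) s).2) := by
  intro l
  induction l with
  | nil =>
    intro _ s hs
    exact ⟨hs, fun x hx => hx, fun v hv => absurd hv (by simp)⟩
  | cons v t ih =>
    intro hl s hs
    obtain ⟨hnd, hmemlvl, hlen, hpt⟩ := hs
    have hadj : adjb edge u v = true := hl v List.mem_cons_self
    have hlt : ∀ w ∈ t, adjb edge u w = true := fun w hw => hl w (List.mem_cons_of_mem _ hw)
    have hvr : 0 ≤ v ∧ v ≤ n :=
      cands_range n edge hn he v (adjb_mem_right edge u v hadj)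
    have hjlt : v.toNat < (n + 1).toNat := by omega
    have hvcast : ((v.toNat : Int)) = v := Int.toNat_of_nonneg hvr.1
    have hval : PySem.List.pyGetD s.1 v 0 =
        if (v ∈ s.2) then ((d : Int) + 1) else DVal edge d v.toNat := by
      rw [getD_int s.1 v hvr.1 (by omega), hpt v.toNat hjlt, hvcast]
    simp only [List.foldl_cons]
    by_cases hmem : v ∈ s.2
    · have hstep : stepF ((d : Int) + 1) s v = s := by
        unfold stepF
        rw [hval, if_pos hmem, if_neg (lt_irrefl _)]
      rw [hstep]
      refine ⟨(ih hlt s ⟨hnd, hmemlvl, hlen, hpt⟩).1, (ih hlt s ⟨hnd, hmemlvl, hlen, hpt⟩).2.1, ?_⟩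
      intro w hw hlw
      rcases List.mem_cons.1 hw with rfl | hw
      · exact (ih hlt s ⟨hnd, hmemlvl, hlen, hpt⟩).2.1 w hmem
      · exact (ih hlt s ⟨hnd, hmemlvl, hlen, hpt⟩).2.2 w hw hlw
    · by_cases hlv : lvl edge v ≤ d
      · have hstep : stepF ((d : Int) + 1) s v = s := by
          unfold stepF
          rw [hval, if_neg hmem]
          unfold DVal
          rw [hvcast, if_pos hlv, if_neg (by push_cast; omega)]
        rw [hstep]
        refine ⟨(ih hlt s ⟨hnd, hmemlvl, hlen, hpt⟩).1, (ih hlt s ⟨hnd, hmemlvl, hlen, hpt⟩).2.1, ?_⟩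
        intro w hw hlw
        rcases List.mem_cons.1 hw with rfl | hw
        · omega
        · exact (ih hlt s ⟨hnd, hmemlvl, hlen, hpt⟩).2.2 w hw hlw
      · -- v gets relaxed and joins the next frontier
        have hlvv : lvl edge v = d + 1 := by
          have hRb : Rb edge (d + 1) v = true := by
            refine (Rb_succ_iff edge d v).2 (Or.inr ⟨u, ?_, hadj⟩)
            rw [← hu]
            exact lvl_spec_Rb edge u (by omega)
          have := lvl_le_of_Rb edge v (d + 1) hcap hRb
          omega
        have hstep : stepF ((d : Int) + 1) s v =
            (s.1.set v.toNat ((d : Int) + 1), s.2 ++ [v]) := by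
          unfold stepF
          rw [hval, if_neg hmem]
          unfold DVal
          rw [hvcast, if_neg hlv, if_pos (by push_cast; omega),
              PySem.List.pySetD_of_nonneg s.1 _ hvr.1]
        rw [hstep]
        have hs' : InvS n edge d (s.1.set v.toNat ((d : Int) + 1), s.2 ++ [v]) := by
          refine ⟨?_, ?_, ?_, ?_⟩
          · simp [List.nodup_append, hnd]
            intro a ha he'; exact hmem (he' ▸ ha)
          · intro w hw
            rcases List.mem_append.1 hw with hw | hw
            · exact hmemlvl w hw
            · simp at hw; subst hw; exact hlvv
          · simpa using hlen
          · intro j hj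
            by_cases hjv : j = v.toNat
            · subst hjv
              rw [getD_set_self' _ _ _ (by omega)]
              rw [if_pos (by rw [hvcast]; exact List.mem_append.2 (Or.inr (List.mem_singleton_self _)))]
            · rw [getD_set_ne' _ _ _ _ hjv, hpt j hj]
              have hne : ((j : Int) ∈ s.2 ++ [v]) ↔ ((j : Int) ∈ s.2) := by
                simp only [List.mem_append, List.mem_singleton]
                constructor
                · rintro (h | h)
                  · exact h
                  · exfalso; apply hjv; rw [← hvcast] at h; omega
                · exact Or.inl
              by_cases hjm : (j : Int) ∈ s.2
              · rw [if_pos hjm, if_pos (hne.2 hjm)]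
              · rw [if_neg hjm, if_neg (fun hc => hjm (hne.1 hc))]
        have ihr := ih hlt _ hs'
        refine ⟨ihr.1, ?_, ?_⟩
        · intro x hx
          exact ihr.2.1 x (List.mem_append.2 (Or.inl hx))
        · intro w hw hlw
          rcases List.mem_cons.1 hw with rfl | hw
          · exact ihr.2.1 w (List.mem_append.2 (Or.inr (List.mem_singleton_self _)))
          · exact ihr.2.2 w hw hlw

-- adjacency-list membership in the frontier graph is exactly adjb
lemma buildGraphF_eq_flat (edge : List (Int × Int)) :
    ∀ g : PySem.Dict Int (List Int),
    edge.foldl (fun g p =>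
      let g1 := g.modify p.1 [] (fun l => l ++ [p.2])
      g1.modify p.2 [] (fun l => l ++ [p.1])) g =
    (edge.flatMap (fun p => [(p.1, p.2), (p.2, p.1)])).foldl
      (fun g p => g.modify p.1 [] (fun l => l ++ [p.2])) g := by
  induction edge with
  | nil => intro g; rfl
  | cons p t ih =>
    intro g
    simp only [List.foldl_cons, List.flatMap_cons, List.foldl_append]
    exact ih _

lemma mem_adjF (edge : List (Int × Int)) (u v : Int) :
    v ∈ (buildGraphF edge).getD u [] ↔ adjb edge u v = true := by
  unfold buildGraphF
  rw [buildGraphF_eq_flat edge PySem.Dict.empty,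
      PySem.Dict.getD_foldl_modify_append, PySem.Dict.getD_empty]
  simp only [List.nil_append, List.mem_map, List.mem_filter, List.mem_flatMap, adjb,
    List.any_eq_true, Bool.or_eq_true, Bool.and_eq_true, beq_iff_eq]
  constructor
  · rintro ⟨q, ⟨⟨p, hp, hq⟩, hq1⟩, hq2⟩
    refine ⟨p, hp, ?_⟩
    simp only [List.mem_cons, List.mem_singleton, List.not_mem_nil, or_false] at hq
    rcases hq with rfl | rfl
    · simp only [beq_iff_eq] at hq1
      exact Or.inl ⟨hq1, hq2⟩
    · simp only [beq_iff_eq] at hq1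
      exact Or.inr ⟨hq2, hq1⟩
  · rintro ⟨p, hp, ⟨h1, h2⟩ | ⟨h1, h2⟩⟩
    · exact ⟨(p.1, p.2), ⟨⟨p, hp, by simp⟩, by simp [h1]⟩, h2⟩
    · exact ⟨(p.2, p.1), ⟨⟨p, hp, by simp⟩, by simp [h2]⟩, h1⟩

lemma outerF (n : Int) (edge : List (Int × Int)) (d : Nat)
    (hn : 1 ≤ n) (he : ∀ p ∈ edge, 0 ≤ p.1 ∧ p.1 ≤ n ∧ 0 ≤ p.2 ∧ p.2 ≤ n)
    (hcap : d + 1 ≤ 50000) :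
    ∀ (Fl : List Int), (∀ u ∈ Fl, lvl edge u = d) →
    ∀ s, InvS n edge d s →
      InvS n edge d (Fl.foldl (fun s u =>
        ((buildGraphF edge).getD u []).foldl (stepF ((d : Int) + 1)) s) s) ∧
      (∀ x ∈ s.2, x ∈ (Fl.foldl (fun s u =>
        ((buildGraphF edge).getD u []).foldl (stepF ((d : Int) + 1)) s) s).2) ∧
      (∀ u ∈ Fl, ∀ v, adjb edge u v = true → lvl edge v = d + 1 →
        v ∈ (Fl.foldl (fun s u =>
          ((buildGraphF edge).getD u []).foldl (stepF ((d : Int) + 1)) s) s).2) := by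
  intro Fl
  induction Fl with
  | nil =>
    intro _ s hs
    exact ⟨hs, fun x hx => hx, fun u hu => absurd hu (by simp)⟩
  | cons u t ih =>
    intro hF s hs
    have hut : ∀ w ∈ t, lvl edge w = d := fun w hw => hF w (List.mem_cons_of_mem _ hw)
    have hu : lvl edge u = d := hF u List.mem_cons_self
    have hin := innerF n edge d u hn he hcap hu ((buildGraphF edge).getD u [])
      (fun v hv => (mem_adjF edge u v).1 hv) s hs
    simp only [List.foldl_cons]
    have ihr := ih hut _ hin.1
    refine ⟨ihr.1, ?_, ?_⟩
    · intro x hx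
      exact ihr.2.1 x (hin.2.1 x hx)
    · intro w hw v hadj hlv
      rcases List.mem_cons.1 hw with rfl | hw
      · exact ihr.2.1 v (hin.2.2 v ((mem_adjF edge w v).2 hadj) hlv)
      · exact ihr.2.2 w hw v hadj hlv

lemma levelF_char (n : Int) (edge : List (Int × Int)) (d : Nat)
    (hn : 1 ≤ n) (he : ∀ p ∈ edge, 0 ≤ p.1 ∧ p.1 ≤ n ∧ 0 ≤ p.2 ∧ p.2 ≤ n)
    (hcap : d + 1 ≤ 50000) (F dist : List Int)
    (hF : FrontOK edge d F) (hD : DistOK n edge d dist) :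
    FrontOK edge (d + 1) (levelF (buildGraphF edge) ((d : Int) + 1) F dist).2 ∧
    DistOK n edge (d + 1) (levelF (buildGraphF edge) ((d : Int) + 1) F dist).1 := by
  have hs0 : InvS n edge d (dist, []) := by
    refine ⟨List.nodup_nil, by simp, hD.1, ?_⟩
    intro j hj
    simp only [List.not_mem_nil, if_false]
    exact hD.2 j hj
  have hout := outerF n edge d hn he hcap F (fun u hu => (hF.2 u).1 hu) (dist, []) hs0
  set s := levelF (buildGraphF edge) ((d : Int) + 1) F dist with hsdef
  have hseq : s = F.foldl (fun s u =>
      ((buildGraphF edge).getD u []).foldl (stepF ((d : Int) + 1)) s) (dist, []) := rfl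
  obtain ⟨⟨hnd, hmlvl, hlen, hpt⟩, _, hcomp⟩ := hout
  rw [← hseq] at hnd hmlvl hlen hpt hcomp
  have hfr : FrontOK edge (d + 1) s.2 := by
    refine ⟨hnd, ?_⟩
    intro v
    constructor
    · exact hmlvl v
    · intro hv
      rcases lvl_pred edge v d hcap hv with ⟨u, hu, hadj⟩
      exact hcomp u ((hF.2 u).2 hu) v hadj hv
  refine ⟨hfr, hlen, ?_⟩
  intro j hj
  rw [hpt j hj]
  unfold DVal
  by_cases hjm : (j : Int) ∈ s.2
  · have := hmlvl _ hjm
    rw [if_pos hjm, if_pos (by omega)]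
    rw [this]
    push_cast
    ring
  · rw [if_neg hjm]
    by_cases hle : lvl edge (j : Int) ≤ d
    · rw [if_pos hle, if_pos (by omega)]
    · have hne : lvl edge (j : Int) ≠ d + 1 := fun hc => hjm ((hfr.2 _).2 hc)
      rw [if_neg hle, if_neg (by omega)]

lemma levelF_cap (n : Int) (edge : List (Int × Int))
    (hn : 1 ≤ n) (he : ∀ p ∈ edge, 0 ≤ p.1 ∧ p.1 ≤ n ∧ 0 ≤ p.2 ∧ p.2 ≤ n)
    (F dist : List Int) (hD : DistOK n edge 50000 dist) :
    levelF (buildGraphF edge) ((50000 : Int) + 1) F dist = (dist, []) := by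
  have hstep : ∀ (l : List Int), (∀ v ∈ l, 0 ≤ v ∧ v ≤ n) →
      l.foldl (stepF ((50000 : Int) + 1)) (dist, ([] : List Int)) = (dist, []) := by
    intro l hl
    induction l with
    | nil => rfl
    | cons v t ih =>
      have hvr := hl v List.mem_cons_self
      have hjlt : v.toNat < (n + 1).toNat := by
        have h1 := hvr.1; have h2 := hvr.2; omega
      have hvcast : ((v.toNat : Int)) = v := Int.toNat_of_nonneg hvr.1
      have hDle : DVal edge 50000 v.toNat ≤ 50000 + 1 := by
        unfold DVal
        split_ifs with h
        · have : ((lvl edge (v.toNat : Int) : Int)) ≤ 50000 := by exact_mod_cast h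
          omega
        · omega
      have hval : stepF ((50000 : Int) + 1) (dist, ([] : List Int)) v = (dist, []) := by
        unfold stepF
        rw [getD_int dist v hvr.1 (by rw [hD.1]; have h1 := hvr.1; have h2 := hvr.2; omega),
            hD.2 v.toNat hjlt, if_neg (not_lt.2 hDle)]
      simp only [List.foldl_cons, hval]
      exact ih (fun w hw => hl w (List.mem_cons_of_mem _ hw))
  unfold levelF
  induction F with
  | nil => rfl
  | cons u t ihF =>
    simp only [List.foldl_cons]
    rw [hstep _ (fun v hv => cands_range n edge hn he v (adjb_mem_right edge u v ((mem_adjF edge u v).1 hv)))]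
    exact ihF

-- all levels above an empty one are empty within the cap
lemma no_higher_level (edge : List (Int × Int)) (d : Nat)
    (hempty : ∀ v, lvl edge v ≠ d) :
    ∀ k, d ≤ k → k ≤ 50000 → ∀ v, lvl edge v ≠ k := by
  intro k hdk hk v hv
  rcases lvl_descend edge k v hv hk d hdk with ⟨w, hw⟩
  exact hempty w hw

lemma farF_eq_of_front (edge : List (Int × Int)) (d : Nat) (hd : d ≤ 50000)
    (hne : ∃ v, lvl edge v = d) (hnone : ∀ v, lvl edge v ≠ d + 1) : farF edge = d := by
  rcases hne with ⟨v, hv⟩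
  have h1 : d ≤ farF edge := hv ▸ farF_ge edge v (by omega)
  rcases farF_inhabited edge with ⟨w, hw⟩
  by_contra hc
  have hgt : d + 1 ≤ farF edge := by omega
  have := no_higher_level edge (d + 1) hnone (farF edge) hgt (farF_le edge) w hw
  exact this

lemma loopF_char (n : Int) (edge : List (Int × Int))
    (hn : 1 ≤ n) (he : ∀ p ∈ edge, 0 ≤ p.1 ∧ p.1 ≤ n ∧ 0 ≤ p.2 ∧ p.2 ≤ n)
    (hfar : farF edge ≤ n.toNat) :
    ∀ (fuel : Nat) (d : Nat) (F dist : List Int) (far : Int),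
    d ≤ 50000 → FrontOK edge d F → DistOK n edge d dist →
    (F = [] → far = (farF edge : Int)) → (F ≠ [] → far = (d : Int)) →
    n.toNat + 1 - d ≤ fuel →
    ∃ D, loopF (buildGraphF edge) fuel F dist far (d : Int) = (D, (farF edge : Int)) ∧
      DistOK n edge 50000 D := by
  intro fuel
  induction fuel with
  | zero =>
    intro d F dist far hd hF hD hfe hfne hfuel
    rcases F with _ | ⟨u, t⟩
    · refine ⟨dist, ?_, ?_⟩
      · rw [hfe rfl]; rfl
      · refine ⟨hD.1, ?_⟩
        intro j hj
        rw [hD.2 j hj]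
        unfold DVal
        have hnone : ∀ v, lvl edge v ≠ d := fun v hv => by
          have := (hF.2 v).2 hv; simp at this
        by_cases hle : lvl edge (j : Int) ≤ d
        · have : lvl edge (j : Int) ≠ d := hnone _
          rw [if_pos hle, if_pos (by omega)]
        · have hhi : ¬ lvl edge (j : Int) ≤ 50000 := by
            intro hc
            exact no_higher_level edge d hnone _ (by omega) hc _ rfl
          rw [if_neg hle, if_neg hhi]
    · exfalso
      have hdle : d ≤ farF edge := by
        have := (hF.2 u).1 List.mem_cons_self
        exact this ▸ farF_ge edge u (by omega)
      omega
  | succ fuel ih =>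
    intro d F dist far hd hF hD hfe hfne hfuel
    rcases F with _ | ⟨u, t⟩
    · -- same as the zero case: empty frontier returns immediately
      refine ⟨dist, ?_, ?_⟩
      · rw [hfe rfl]; rfl
      · refine ⟨hD.1, ?_⟩
        intro j hj
        rw [hD.2 j hj]
        unfold DVal
        have hnone : ∀ v, lvl edge v ≠ d := fun v hv => by
          have := (hF.2 v).2 hv; simp at this
        by_cases hle : lvl edge (j : Int) ≤ d
        · rw [if_pos hle, if_pos (by omega)]
        · have hhi : ¬ lvl edge (j : Int) ≤ 50000 := by
            intro hc
            exact no_higher_level edge d hnone _ (by omega) hc _ rfl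
          rw [if_neg hle, if_neg hhi]
    · have hfar' : far = (d : Int) := hfne (by simp)
      have hdle : d ≤ farF edge := by
        have := (hF.2 u).1 List.mem_cons_self
        exact this ▸ farF_ge edge u (by omega)
      rcases Nat.lt_or_ge d 50000 with hdlt | hdge
      · -- normal level
        have hcap : d + 1 ≤ 50000 := by omega
        have hlev := levelF_char n edge d hn he hcap (u :: t) dist hF hD
        set s := levelF (buildGraphF edge) ((d : Int) + 1) (u :: t) dist with hsdef
        have hrec : loopF (buildGraphF edge) (fuel + 1) (u :: t) dist far (d : Int) =
            loopF (buildGraphF edge) fuel s.2 s.1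
              (if s.2.isEmpty then far else (d : Int) + 1) ((d : Int) + 1) := rfl
        rw [hrec]
        have hcast : ((d : Int) + 1) = ((d + 1 : Nat) : Int) := by push_cast; ring
        rw [hcast]
        apply ih (d + 1) s.2 s.1 _ hcap hlev.1 hlev.2
        · intro hs2
          rw [hs2]
          simp only [List.isEmpty_nil, if_true, hfar']
          have : farF edge = d := by
            apply farF_eq_of_front edge d hd ⟨u, (hF.2 u).1 List.mem_cons_self⟩
            intro v hv
            have : v ∈ s.2 := (hlev.1.2 v).2 hv
            rw [hs2] at this
            cases this
          rw [this]
        · intro hs2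
          rw [if_neg (by simpa [List.isEmpty_iff] using hs2)]
        · omega
      · -- d = 50000: the cap empties the next frontier
        have hdeq : d = 50000 := by omega
        subst hdeq
        rw [show ((50000 : Nat) : Int) = (50000 : Int) from by norm_num]
        have hlev := levelF_cap n edge hn he (u :: t) dist hD
        have hrec : loopF (buildGraphF edge) (fuel + 1) (u :: t) dist far (50000 : Int) =
            loopF (buildGraphF edge) fuel
              (levelF (buildGraphF edge) ((50000 : Int) + 1) (u :: t) dist).2
              (levelF (buildGraphF edge) ((50000 : Int) + 1) (u :: t) dist).1
              (if (levelF (buildGraphF edge) ((50000 : Int) + 1) (u :: t) dist).2.isEmpty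
                then far else (50000 : Int) + 1) ((50000 : Int) + 1) := by
          norm_num [loopF]
        rw [hrec, hlev]
        simp only [List.isEmpty_nil, if_true]
        have hfeq : farF edge = 50000 := by
          have := farF_le edge
          omega
        refine ⟨dist, ?_, hD⟩
        cases fuel <;> simp [loopF, hfar', hfeq]

lemma farF_le_n (n : Int) (edge : List (Int × Int)) (hn : 1 ≤ n)
    (he : ∀ p ∈ edge, 0 ≤ p.1 ∧ p.1 ≤ n ∧ 0 ≤ p.2 ∧ p.2 ≤ n) :
    farF edge ≤ n.toNat := by
  classical
  rcases farF_inhabited edge with ⟨v, hv⟩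
  have hlvl : ∀ k ≤ farF edge, ∃ w, lvl edge w = k :=
    lvl_descend edge (farF edge) v hv (farF_le edge)
  by_contra hc
  push_neg at hc
  let f : Nat → Int := fun k => if h : ∃ w, lvl edge w = k then h.choose else 0
  have hf : ∀ k ≤ farF edge, lvl edge (f k) = k := by
    intro k hk
    have hex := hlvl k hk
    simp only [f]
    rw [dif_pos hex]
    exact hex.choose_spec
  have hmem : ∀ k ∈ Finset.range (farF edge + 1), f k ∈ Finset.Icc (0 : Int) n := by
    intro k hk
    have hk' := Finset.mem_range.1 hk
    have h1 := hf k (by omega)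
    have hr := lvl_range n edge hn he (f k) (by rw [h1]; have := farF_le edge; omega)
    exact Finset.mem_Icc.2 ⟨hr.1, hr.2⟩
  have hinj : Set.InjOn f (Finset.range (farF edge + 1)) := by
    intro a ha b hb hab
    simp only [Finset.coe_range, Set.mem_Iio] at ha hb
    have h1 := hf a (by omega)
    have h2 := hf b (by omega)
    rw [hab] at h1
    omega
  have hcard := Finset.card_le_card_of_injOn f hmem hinj
  rw [Finset.card_range, Int.card_Icc] at hcard
  omega

theorem frontier_char (n : Int) (edge : List (Int × Int)) (hn : 1 ≤ n)
    (he : ∀ p ∈ edge, 0 ≤ p.1 ∧ p.1 ≤ n ∧ 0 ≤ p.2 ∧ p.2 ≤ n) :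
    frontierSol n edge =
      ((List.range n.toNat).countP (fun j : Nat => lvl edge ((j : Int) + 1) == farF edge) : Int) := by
  have h1L : 1 < (n + 1).toNat := by omega
  have hset : PySem.List.pySet? (List.replicate (n + 1).toNat (50001 : Int)) 1 0 =
      some ((List.replicate (n + 1).toNat (50001 : Int)).set 1 0) := by
    rw [show (1 : Int) = ((1 : Nat) : Int) by simp]
    exact PySem.List.pySet?_natCast _ 1 0 (by simpa using h1L)
  set dist := (List.replicate (n + 1).toNat (50001 : Int)).set 1 0 with hdist
  have hlen : dist.length = (n + 1).toNat := by simp [hdist]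
  have hF0 : FrontOK edge 0 [1] := by
    refine ⟨List.nodup_singleton _, ?_⟩
    intro v
    rw [List.mem_singleton, lvl_zero_iff]
  have hD0 : DistOK n edge 0 dist := by
    refine ⟨hlen, ?_⟩
    intro j hj
    unfold DVal
    by_cases hj1 : j = 1
    · subst hj1
      rw [hdist, getD_set_self' _ _ _ (by simp; omega)]
      rw [show ((1 : Nat) : Int) = (1 : Int) from rfl, lvl_one edge]
      simp
    · rw [hdist, getD_set_ne' _ _ _ _ hj1]
      have hrep : (List.replicate (n + 1).toNat (50001 : Int)).getD j 0 = 50001 := by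
        simp [hj]
      rw [hrep]
      have : ¬ lvl edge (j : Int) ≤ 0 := by
        intro hc
        have : lvl edge (j : Int) = 0 := by omega
        rw [lvl_zero_iff] at this
        omega
      rw [if_neg this]
  have hchar := loopF_char n edge hn he (farF_le_n n edge hn he) (n.toNat + 2) 0 [1] dist 0
    (by omega) hF0 hD0 (by intro h; cases h) (by intro _; simp) (by omega)
  rcases hchar with ⟨D, hr, hD50⟩
  rw [show ((0 : Nat) : Int) = (0 : Int) from rfl] at hr
  simp only [frontierSol, hset]
  rw [hr]
  -- D is the level table
  have hDmap : D = (List.range (n + 1).toNat).map (fun j => DVal edge 50000 j) := by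
    apply List.ext_getElem
    · rw [hD50.1, List.length_map, List.length_range]
    · intro j hj1 hj2
      have hjN : j < (n + 1).toNat := by rw [hD50.1] at hj1; exact hj1
      have := hD50.2 j hjN
      rw [List.getD_eq_getElem D 0 hj1] at this
      rw [this]
      simp
  have hslice : PySem.List.slice D (some 1) none = D.drop 1 := by
    rw [PySem.List.slice_from D (by omega : (0:Int) ≤ 1)]
    rfl
  rw [hslice, PySem.List.foldl_count_if]
  have hcnt : List.countP (fun x => x == ((farF edge : Nat) : Int)) (List.drop 1 D) =
      List.countP (fun j : Nat => lvl edge ((j : Int) + 1) == farF edge) (List.range n.toNat) := by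
    rw [hDmap, ← List.map_drop]
    rw [show (n + 1).toNat = n.toNat + 1 from by omega, List.range_succ_eq_map]
    simp only [List.drop_succ_cons, List.drop_zero, List.countP_map]
    apply List.countP_congr
    intro j _
    simp only [Function.comp]
    unfold DVal
    have hcast : ((Nat.succ j : Nat) : Int) = (j : Int) + 1 := by push_cast; ring
    by_cases hle : lvl edge ((j : Int) + 1) ≤ 50000
    · rw [hcast, if_pos hle]
      simp only [beq_iff_eq]
      constructor
      · intro h; exact_mod_cast h
      · intro h; exact_mod_cast h
    · rw [hcast, if_neg hle]
      have hfle := farF_le edge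
      simp only [beq_iff_eq]
      constructor
      · intro h
        exfalso
        have h2 : ((farF edge : Nat) : Int) ≤ 50000 := by exact_mod_cast hfle
        omega
      · intro h
        omega
  show (0 : Int) + _ = _
  rw [hcnt]
  push_cast
  ring

-- ---------- part 4: the Bellman-Ford relaxation computes the level function ----------
def BInv (edge : List (Int × Int)) (d : PySem.Dict Int Int) : Prop :=
  d.keys.Nodup ∧ d.get? 1 = some 0 ∧
  (∀ v val, d.get? v = some val →
    (∃ k : Nat, val = (k : Int) ∧ k ≤ 50000 ∧ Rb edge k v = true) ∧ v ∈ cands edge)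

def bmeasure (edge : List (Int × Int)) (d : PySem.Dict Int Int) : Nat :=
  (((cands edge).dedup).map (fun v => (d.getD v 50001).toNat)).sum

lemma BInv_getD (edge : List (Int × Int)) (d : PySem.Dict Int Int) (h : BInv edge d) (v : Int) :
    0 ≤ d.getD v 50001 ∧ d.getD v 50001 ≤ 50001 := by
  rw [PySem.Dict.getD_eq_get?_getD]
  cases hg : d.get? v with
  | none => simp
  | some val =>
    rcases (h.2.2 v val hg).1 with ⟨k, rfl, hk, _⟩
    simp only [Option.getD_some]
    constructor
    · exact_mod_cast Nat.zero_le k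
    · exact_mod_cast (by omega : k ≤ 50001)

lemma relax1 (edge : List (Int × Int)) (a b : Int) (hab : adjb edge a b = true)
    (d : PySem.Dict Int Int) (h : BInv edge d)
    (hcond : d.getD a 50001 + 1 < d.getD b 50001) :
    BInv edge (d.insert b (d.getD a 50001 + 1)) ∧
    (∀ v, (d.insert b (d.getD a 50001 + 1)).getD v 50001 ≤ d.getD v 50001) ∧
    b ∈ (cands edge).dedup ∧
    (d.insert b (d.getD a 50001 + 1)).getD b 50001 < d.getD b 50001 := by
  have hb50 := BInv_getD edge d h b
  have hapresent : ∃ ka : Nat, d.get? a = some (ka : Int) ∧ ka + 1 ≤ 50000 ∧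
      Rb edge ka a = true := by
    cases hg : d.get? a with
    | none =>
      exfalso
      rw [PySem.Dict.getD_eq_get?_getD, hg] at hcond
      simp at hcond
      omega
    | some val =>
      rcases (h.2.2 a val hg).1 with ⟨k, hkv, hk, hRb⟩
      subst hkv
      refine ⟨k, rfl, ?_, hRb⟩
      have hgda' : d.getD a 50001 = (k : Int) := by
        rw [PySem.Dict.getD_eq_get?_getD, hg]; rfl
      rw [hgda'] at hcond
      have hb := (BInv_getD edge d h b).2
      omega
  rcases hapresent with ⟨ka, hga, hka, hRba⟩
  have hgda : d.getD a 50001 = (ka : Int) := by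
    rw [PySem.Dict.getD_eq_get?_getD, hga]; rfl
  have hbne1 : b ≠ 1 := by
    intro hb1
    rw [hb1] at hcond
    have hgb : d.getD 1 50001 = 0 := by
      rw [PySem.Dict.getD_eq_get?_getD, h.2.1]; rfl
    rw [hgb] at hcond
    have := (BInv_getD edge d h a).1
    omega
  refine ⟨⟨PySem.Dict.nodup_keys_insert d b _ h.1, ?_, ?_⟩, ?_, ?_, ?_⟩
  · rw [PySem.Dict.get?_insert, if_neg (Ne.symm hbne1)]
    exact h.2.1
  · intro v val hg
    rw [PySem.Dict.get?_insert] at hg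
    by_cases hvb : v = b
    · rw [if_pos hvb] at hg
      injection hg with hval
      subst hvb
      refine ⟨⟨ka + 1, ?_, hka, ?_⟩, adjb_mem_right edge a v hab⟩
      · rw [← hval, hgda]; push_cast; ring
      · exact (Rb_succ_iff edge ka v).2 (Or.inr ⟨a, hRba, hab⟩)
    · rw [if_neg hvb] at hg
      exact h.2.2 v val hg
  · intro v
    rw [PySem.Dict.getD_insert]
    by_cases hvb : v = b
    · rw [if_pos hvb, hvb]; omega
    · rw [if_neg hvb]
  · exact List.mem_dedup.2 (adjb_mem_right edge a b hab)
  · rw [PySem.Dict.getD_insert, if_pos rfl]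
    omega

lemma adjb_of_mem (edge : List (Int × Int)) (p : Int × Int) (hp : p ∈ edge) :
    adjb edge p.1 p.2 = true := by
  unfold adjb
  refine List.any_eq_true.2 ⟨p, hp, ?_⟩
  simp

lemma bfStep_cases (edge : List (Int × Int)) (p : Int × Int) (hp : p ∈ edge)
    (d : PySem.Dict Int Int) (c : Bool) (h : BInv edge d) :
    (bfStep (d, c) p = (d, c) ∧
      ¬(d.getD p.1 50001 + 1 < d.getD p.2 50001) ∧
      ¬(d.getD p.2 50001 + 1 < d.getD p.1 50001)) ∨
    ((bfStep (d, c) p).2 = true ∧ BInv edge (bfStep (d, c) p).1 ∧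
      (∀ v, (bfStep (d, c) p).1.getD v 50001 ≤ d.getD v 50001) ∧
      ∃ w ∈ (cands edge).dedup, (bfStep (d, c) p).1.getD w 50001 < d.getD w 50001) := by
  have hab : adjb edge p.1 p.2 = true := adjb_of_mem edge p hp
  have hba : adjb edge p.2 p.1 = true := by rw [adjb_symm]; exact hab
  by_cases h1 : d.getD p.1 50001 + 1 < d.getD p.2 50001
  · -- first direction relaxes
    rcases relax1 edge p.1 p.2 hab d h h1 with ⟨hinv1, hle1, hmem1, hlt1⟩
    set d1 := d.insert p.2 (d.getD p.1 50001 + 1) with hd1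
    have hstep : bfStep (d, c) p =
        if d1.getD p.2 50001 + 1 < d1.getD p.1 50001
        then (d1.insert p.1 (d1.getD p.2 50001 + 1), true) else (d1, true) := by
      simp only [bfStep, hd1]
      rw [if_pos h1]
    by_cases h2 : d1.getD p.2 50001 + 1 < d1.getD p.1 50001
    · rcases relax1 edge p.2 p.1 hba d1 hinv1 h2 with ⟨hinv2, hle2, hmem2, hlt2⟩
      rw [hstep, if_pos h2]
      refine Or.inr ⟨rfl, hinv2, ?_, ⟨p.2, hmem1, ?_⟩⟩
      · intro v
        exact le_trans (hle2 v) (hle1 v)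
      · exact lt_of_le_of_lt (hle2 p.2) hlt1
    · rw [hstep, if_neg h2]
      exact Or.inr ⟨rfl, hinv1, hle1, ⟨p.2, hmem1, hlt1⟩⟩
  · -- first direction does not relax
    have hstep : bfStep (d, c) p =
        if d.getD p.2 50001 + 1 < d.getD p.1 50001
        then (d.insert p.1 (d.getD p.2 50001 + 1), true) else (d, c) := by
      simp only [bfStep]
      rw [if_neg h1]
    by_cases h2 : d.getD p.2 50001 + 1 < d.getD p.1 50001
    · rcases relax1 edge p.2 p.1 hba d h h2 with ⟨hinv2, hle2, hmem2, hlt2⟩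
      rw [hstep, if_pos h2]
      exact Or.inr ⟨rfl, hinv2, hle2, ⟨p.1, hmem2, hlt2⟩⟩
    · rw [hstep, if_neg h2]
      exact Or.inl ⟨rfl, h1, h2⟩

lemma bmeasure_mono (edge : List (Int × Int)) (d1 d2 : PySem.Dict Int Int)
    (h : ∀ v, d1.getD v 50001 ≤ d2.getD v 50001) : bmeasure edge d1 ≤ bmeasure edge d2 := by
  unfold bmeasure
  exact List.sum_le_sum (fun v _ => Int.toNat_le_toNat (h v))

lemma bmeasure_strict (edge : List (Int × Int)) (d1 d2 : PySem.Dict Int Int)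
    (hpos : ∀ v, 0 ≤ d1.getD v 50001)
    (h : ∀ v, d1.getD v 50001 ≤ d2.getD v 50001)
    (w : Int) (hw : w ∈ (cands edge).dedup) (hs : d1.getD w 50001 < d2.getD w 50001) :
    bmeasure edge d1 < bmeasure edge d2 := by
  unfold bmeasure
  refine List.sum_lt_sum _ _ (fun v _ => Int.toNat_le_toNat (h v)) ⟨w, hw, ?_⟩
  have := hpos w
  omega

lemma bfPass (edge : List (Int × Int)) :
    ∀ (l : List (Int × Int)), (∀ q ∈ l, q ∈ edge) → ∀ (d : PySem.Dict Int Int) (c : Bool),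
    BInv edge d →
    BInv edge (l.foldl bfStep (d, c)).1 ∧
    (∀ v, (l.foldl bfStep (d, c)).1.getD v 50001 ≤ d.getD v 50001) ∧
    ((l.foldl bfStep (d, c)).2 = false →
      c = false ∧ (l.foldl bfStep (d, c)).1 = d ∧
      ∀ q ∈ l, ¬(d.getD q.1 50001 + 1 < d.getD q.2 50001) ∧
               ¬(d.getD q.2 50001 + 1 < d.getD q.1 50001)) ∧
    (c = false → (l.foldl bfStep (d, c)).2 = true →
      bmeasure edge (l.foldl bfStep (d, c)).1 < bmeasure edge d) := by
  intro l
  induction l with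
  | nil =>
    intro _ d c h
    refine ⟨h, fun v => le_refl _, ?_, ?_⟩
    · intro hfalse
      exact ⟨hfalse, rfl, fun q hq => absurd hq (by simp)⟩
    · intro hc htrue
      rw [hc] at htrue
      cases htrue
  | cons q t ih =>
    intro hl d c h
    have hq : q ∈ edge := hl q List.mem_cons_self
    have hlt : ∀ r ∈ t, r ∈ edge := fun r hr => hl r (List.mem_cons_of_mem _ hr)
    simp only [List.foldl_cons]
    rcases bfStep_cases edge q hq d c h with ⟨hid, hc1, hc2⟩ | ⟨hflag, hinv, hle, w, hw, hlt2⟩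
    · rw [hid]
      rcases ih hlt d c h with ⟨i1, i2, i3, i4⟩
      refine ⟨i1, i2, ?_, i4⟩
      intro hfalse
      rcases i3 hfalse with ⟨j1, j2, j3⟩
      refine ⟨j1, j2, ?_⟩
      intro r hr
      rcases List.mem_cons.1 hr with rfl | hr
      · exact ⟨hc1, hc2⟩
      · exact j3 r hr
    · -- a relaxation happened in this step: flag is true from here on
      rcases hsp : bfStep (d, c) q with ⟨d1, c1⟩
      rw [hsp] at hflag hinv hle hlt2
      simp only at hflag hinv hle hlt2
      rcases ih hlt d1 c1 hinv with ⟨i1, i2, i3, i4⟩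
      refine ⟨i1, ?_, ?_, ?_⟩
      · intro v
        exact le_trans (i2 v) (hle v)
      · intro hfalse
        exfalso
        rcases i3 hfalse with ⟨j1, _, _⟩
        rw [hflag] at j1
        cases j1
      · intro _ _
        have h1lt : bmeasure edge d1 < bmeasure edge d :=
          bmeasure_strict edge d1 d (fun v => (BInv_getD edge d1 hinv v).1) hle w hw hlt2
        have h2le : bmeasure edge (t.foldl bfStep (d1, c1)).1 ≤ bmeasure edge d1 :=
          bmeasure_mono edge _ _ i2
        omega

lemma bfLoop_char (edge : List (Int × Int)) :
    ∀ (fuel : Nat) (d : PySem.Dict Int Int), BInv edge d → bmeasure edge d < fuel →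
    BInv edge (bfLoop edge fuel d) ∧
    ∀ q ∈ edge,
      ¬((bfLoop edge fuel d).getD q.1 50001 + 1 < (bfLoop edge fuel d).getD q.2 50001) ∧
      ¬((bfLoop edge fuel d).getD q.2 50001 + 1 < (bfLoop edge fuel d).getD q.1 50001) := by
  intro fuel
  induction fuel with
  | zero => intro d _ hm; omega
  | succ fuel ih =>
    intro d h hm
    rcases bfPass edge edge (fun q hq => hq) d false h with ⟨i1, i2, i3, i4⟩
    by_cases hs2 : (edge.foldl bfStep (d, false)).2 = true
    · have hrec : bfLoop edge (fuel + 1) d = bfLoop edge fuel (edge.foldl bfStep (d, false)).1 := by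
        simp only [bfLoop, hs2, if_true]
      rw [hrec]
      exact ih _ i1 (by have := i4 rfl hs2; omega)
    · have hfalse : (edge.foldl bfStep (d, false)).2 = false := by
        revert hs2; cases (edge.foldl bfStep (d, false)).2 <;> simp
      have hrec : bfLoop edge (fuel + 1) d = (edge.foldl bfStep (d, false)).1 := by
        show (if (edge.foldl bfStep (d, false)).2 = true
          then bfLoop edge fuel (edge.foldl bfStep (d, false)).1
          else (edge.foldl bfStep (d, false)).1) = _
        rw [if_neg (by rw [hfalse]; exact Bool.false_ne_true)]
      rcases i3 hfalse with ⟨_, j2, j3⟩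
      rw [hrec, j2]
      exact ⟨h, j3⟩

lemma fix_le (edge : List (Int × Int)) (d : PySem.Dict Int Int)
    (h1 : d.get? 1 = some 0)
    (hfix : ∀ q ∈ edge,
      ¬(d.getD q.1 50001 + 1 < d.getD q.2 50001) ∧
      ¬(d.getD q.2 50001 + 1 < d.getD q.1 50001)) :
    ∀ (k : Nat), k ≤ 50000 → ∀ v, Rb edge k v = true → d.getD v 50001 ≤ (k : Int) := by
  intro k
  induction k with
  | zero =>
    intro _ v hv
    simp only [Rb, beq_iff_eq] at hv
    subst hv
    rw [PySem.Dict.getD_eq_get?_getD, h1]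
    simp
  | succ k ih =>
    intro hk v hv
    rcases (Rb_succ_iff edge k v).1 hv with hv | ⟨u, hu, hadj⟩
    · have := ih (by omega) v hv
      push_cast
      omega
    · have hule := ih (by omega) u hu
      unfold adjb at hadj
      rcases List.any_eq_true.1 hadj with ⟨p, hp, hc⟩
      simp only [Bool.or_eq_true, Bool.and_eq_true, beq_iff_eq] at hc
      rcases hfix p hp with ⟨f1, f2⟩
      rcases hc with ⟨hc1, hc2⟩ | ⟨hc1, hc2⟩
      · subst hc1; subst hc2
        push_cast
        omega
      · subst hc1; subst hc2
        push_cast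
        omega

lemma fix_getD (edge : List (Int × Int)) (d : PySem.Dict Int Int) (h : BInv edge d)
    (hfix : ∀ q ∈ edge,
      ¬(d.getD q.1 50001 + 1 < d.getD q.2 50001) ∧
      ¬(d.getD q.2 50001 + 1 < d.getD q.1 50001)) :
    ∀ v, d.getD v 50001 = (lvl edge v : Int) := by
  intro v
  by_cases hle : lvl edge v ≤ 50000
  · have hRb := lvl_spec_Rb edge v hle
    have hub := fix_le edge d h.2.1 hfix (lvl edge v) hle v hRb
    rw [PySem.Dict.getD_eq_get?_getD] at hub ⊢
    cases hg : d.get? v with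
    | none =>
      exfalso
      rw [hg] at hub
      simp only [Option.getD_none] at hub
      have : ((lvl edge v : Nat) : Int) ≤ 50000 := by exact_mod_cast hle
      omega
    | some val =>
      rcases (h.2.2 v val hg).1 with ⟨k, rfl, hk, hRbk⟩
      rw [hg] at hub
      simp only [Option.getD_some] at hub ⊢
      have hlk : lvl edge v ≤ k := lvl_le_of_Rb edge v k hk hRbk
      have h2 : ((lvl edge v : Nat) : Int) ≤ (k : Int) := by exact_mod_cast hlk
      omega
  · have hlvl : lvl edge v = 50001 := by
      have := lvl_le_cap edge v
      omega
    rw [hlvl, PySem.Dict.getD_eq_get?_getD]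
    cases hg : d.get? v with
    | none => simp
    | some val =>
      exfalso
      rcases (h.2.2 v val hg).1 with ⟨k, rfl, hk, hRbk⟩
      have := lvl_le_of_Rb edge v k hk hRbk
      omega

lemma beq_cast_eq (a b : Nat) : (((a : Nat) : Int) == ((b : Nat) : Int)) = ((a : Nat) == (b : Nat)) := by
  by_cases hab : a = b
  · subst hab
    rw [beq_self_eq_true, beq_self_eq_true]
  · rw [beq_eq_false_iff_ne.2 (fun hc => hab (by exact_mod_cast hc)),
        beq_eq_false_iff_ne.2 hab]

lemma cands_length (edge : List (Int × Int)) : (cands edge).length = 1 + 2 * edge.length := by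
  unfold cands
  induction edge with
  | nil => rfl
  | cons p t ih =>
    simp only [List.flatMap_cons, List.length_cons, List.length_append] at ih ⊢
    simp at ih ⊢
    omega

-- counting over range(1, n+1) through an abstract distance table
lemma count_eq_of_getD (n : Int) (edge : List (Int × Int)) (R : PySem.Dict Int Int)
    (hgetD : ∀ v, R.getD v 50001 = (lvl edge v : Int)) :
    List.countP (fun i => R.getD i 50001 == ((farF edge : Nat) : Int))
      (PySem.List.pyRange 1 (n + 1)) =
    List.countP (fun j : Nat => lvl edge ((j : Int) + 1) == farF edge)
      (List.range n.toNat) := by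
  rw [PySem.List.pyRange_one 1 (n + 1), List.countP_map,
      show (n + 1 - 1 : Int) = n from by ring]
  apply List.countP_congr
  intro j _
  simp only [Function.comp_apply]
  rw [hgetD ((1 : Int) + (j : Int)), show (1 : Int) + (j : Int) = (j : Int) + 1 from by ring,
      beq_cast_eq]


theorem alt_char (n : Int) (edge : List (Int × Int)) :
    solution_alt n edge =
      ((List.range n.toNat).countP (fun j : Nat => lvl edge ((j : Int) + 1) == farF edge) : Int) := by
  set dict0 : PySem.Dict Int Int := PySem.Dict.empty.insert 1 0 with hdict0
  have hB0 : BInv edge dict0 := by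
    refine ⟨PySem.Dict.nodup_keys_insert _ 1 0 (by simp [PySem.Dict.keys_empty]), ?_, ?_⟩
    · exact PySem.Dict.get?_insert_self _ 1 0
    · intro v val hg
      rw [hdict0, PySem.Dict.get?_insert] at hg
      by_cases hv1 : v = 1
      · rw [if_pos hv1] at hg
        injection hg with hval
        subst hv1
        exact ⟨⟨0, hval.symm, by omega, by simp [Rb]⟩, List.mem_cons_self⟩
      · rw [if_neg hv1, PySem.Dict.get?_empty] at hg
        cases hg
  have hmeas : bmeasure edge dict0 < 50002 * (2 * edge.length + 1) + 1 := by
    have hterm : ∀ x ∈ ((cands edge).dedup).map (fun v => (dict0.getD v 50001).toNat),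
        x ≤ 50001 := by
      intro x hx
      rcases List.mem_map.1 hx with ⟨v, _, rfl⟩
      have := BInv_getD edge dict0 hB0 v
      omega
    have hsum := List.sum_le_card_nsmul _ 50001 hterm
    have hlen : ((cands edge).dedup).length ≤ 1 + 2 * edge.length := by
      have := List.Sublist.length_le (List.dedup_sublist (cands edge))
      rw [cands_length edge] at this
      exact this
    unfold bmeasure
    rw [smul_eq_mul] at hsum
    have hlenmap : (((cands edge).dedup).map (fun v => (dict0.getD v 50001).toNat)).length
        = ((cands edge).dedup).length := by simp
    rw [hlenmap] at hsum
    calc (((cands edge).dedup).map (fun v => (dict0.getD v 50001).toNat)).sum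
        ≤ ((cands edge).dedup).length * 50001 := hsum
      _ ≤ (1 + 2 * edge.length) * 50001 := Nat.mul_le_mul_right _ hlen
      _ < 50002 * (2 * edge.length + 1) + 1 := by ring_nf; omega
  obtain ⟨hRB, hfix⟩ := bfLoop_char edge (50002 * (2 * edge.length + 1) + 1) dict0 hB0 hmeas
  set R := bfLoop edge (50002 * (2 * edge.length + 1) + 1) dict0 with hRdef
  have hgetD : ∀ v, R.getD v 50001 = (lvl edge v : Int) := fix_getD edge R hRB hfix
  have hkeys50 : ∀ k ∈ R.keys, lvl edge k ≤ 50000 := by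
    intro k hk
    cases hg : R.get? k with
    | none => exact absurd hk ((PySem.Dict.get?_eq_none_iff_not_mem_keys R k).1 hg)
    | some val =>
      rcases (hRB.2.2 k val hg).1 with ⟨k', _, hk', hRbk⟩
      exact le_trans (lvl_le_of_Rb edge k k' hk' hRbk) hk'
  have hvalues : R.values = R.keys.map (fun k => R.getD k 50001) :=
    PySem.Dict.values_eq_map_keys R hRB.1 50001
  have h1mem : (1 : Int) ∈ R.keys := by
    by_contra hc
    rw [← PySem.Dict.get?_eq_none_iff_not_mem_keys] at hc
    rw [hRB.2.1] at hc
    cases hc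
  have hfarmem : ((farF edge : Nat) : Int) ∈ R.values := by
    rcases farF_inhabited edge with ⟨w, hw⟩
    have hw50 : lvl edge w ≤ 50000 := by rw [hw]; exact farF_le edge
    have hwkey : w ∈ R.keys := by
      by_contra hc
      rw [← PySem.Dict.get?_eq_none_iff_not_mem_keys] at hc
      have := hgetD w
      rw [PySem.Dict.getD_eq_get?_getD, hc] at this
      simp only [Option.getD_none] at this
      have : ((lvl edge w : Nat) : Int) = 50001 := this.symm
      have : lvl edge w = 50001 := by exact_mod_cast this
      omega
    rw [hvalues]
    exact List.mem_map.2 ⟨w, hwkey, by rw [hgetD w, hw]⟩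
  have hvle : ∀ y ∈ R.values, y ≤ ((farF edge : Nat) : Int) := by
    intro y hy
    rw [hvalues] at hy
    rcases List.mem_map.1 hy with ⟨k, hk, rfl⟩
    rw [hgetD k]
    exact_mod_cast farF_ge edge k (hkeys50 k hk)
  have hmax : PySem.List.max? R.values (fun x => x) = some ((farF edge : Nat) : Int) := by
    cases hmx : PySem.List.max? R.values (fun x => x) with
    | none =>
      exfalso
      have := (PySem.List.max?_eq_none_iff R.values (fun x => x)).1 hmx
      rw [this] at hfarmem
      cases hfarmem
    | some m =>
      have hmmem := PySem.List.max?_mem hmx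
      have h1 := hvle m hmmem
      have h2 := PySem.List.max?_isMax hmx _ hfarmem
      simp only at h2
      have : m = ((farF edge : Nat) : Int) := le_antisymm h1 h2
      rw [this]
  -- unfold solution_alt and finish
  have hfarval : (match PySem.List.max? R.values (fun x => x) with
      | some m => m | none => (0 : Int)) = ((farF edge : Nat) : Int) := by rw [hmax]
  simp only [solution_alt, ← hdict0, ← hRdef, hfarval]
  rw [PySem.List.foldl_count_if, count_eq_of_getD n edge R hgetD]
  push_cast
  ring

-- with node 1 absent from the edges only node 1 is reachable, so the count is 1
lemma Rb_no1 (edge : List (Int × Int)) (h1 : ∀ p ∈ edge, p.1 ≠ 1 ∧ p.2 ≠ 1) :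
    ∀ k v, Rb edge k v = true → v = 1 := by
  intro k
  induction k with
  | zero =>
    intro v hv
    simpa [Rb] using hv
  | succ k ih =>
    intro v hv
    rcases (Rb_succ_iff edge k v).1 hv with hv | ⟨u, hu, hadj⟩
    · exact ih v hv
    · exfalso
      have hu1 : u = 1 := ih u hu
      subst hu1
      unfold adjb at hadj
      rcases List.any_eq_true.1 hadj with ⟨p, hp, hc⟩
      simp only [Bool.or_eq_true, Bool.and_eq_true, beq_iff_eq] at hc
      rcases h1 p hp with ⟨hp1, hp2⟩
      rcases hc with ⟨hc1, _⟩ | ⟨_, hc2⟩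
      · exact hp1 hc1
      · exact hp2 hc2

lemma cnt_no1 (n : Int) (edge : List (Int × Int)) (hn : 1 ≤ n)
    (h1 : ∀ p ∈ edge, p.1 ≠ 1 ∧ p.2 ≠ 1) :
    (List.range n.toNat).countP (fun j : Nat => lvl edge ((j : Int) + 1) == farF edge) = 1 := by
  have hlvlother : ∀ v : Int, v ≠ 1 → lvl edge v = 50001 := by
    intro v hv
    by_cases hle : lvl edge v ≤ 50000
    · exact absurd (Rb_no1 edge h1 _ v (lvl_spec_Rb edge v hle)) hv
    · have := lvl_le_cap edge v
      omega
  have hfar0 : farF edge = 0 := by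
    rcases farF_inhabited edge with ⟨w, hw⟩
    have hw50 : lvl edge w ≤ 50000 := by rw [hw]; exact farF_le edge
    have hw1 : w = 1 := Rb_no1 edge h1 _ w (lvl_spec_Rb edge w hw50)
    subst hw1
    rw [lvl_one] at hw
    omega
  rw [hfar0]
  rw [show n.toNat = (n.toNat - 1) + 1 from by omega, List.range_succ_eq_map]
  rw [List.countP_cons, List.countP_map]
  have hhead : (fun j : Nat => lvl edge ((j : Int) + 1) == 0) 0 = true := by
    simp only [Nat.cast_zero, zero_add, lvl_one edge]
    rfl
  have htail : List.countP ((fun j : Nat => lvl edge ((j : Int) + 1) == 0) ∘ Nat.succ)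
      (List.range (n.toNat - 1)) = 0 := by
    apply List.countP_eq_zero.2
    intro j _
    simp only [Function.comp]
    have : ((Nat.succ j : Nat) : Int) + 1 ≠ 1 := by push_cast; omega
    rw [hlvlother _ this]
    simp
  rw [htail]
  simp [lvl_one edge]

-- ===== VERDICT (by name: the statement is the Claim_ definition above) =====
theorem solution_spec : Claim_equal_solution := by
  intro n edge _ hpre
  unfold Spec_solution
  obtain ⟨hn, hedge | h1⟩ := hpre
  · rw [final_inrange n edge ⟨hn, hedge⟩, frontier_char n edge hn hedge, alt_char n edge]
  · rw [solutionA_no1 n edge hn h1, alt_char n edge, cnt_no1 n edge hn h1]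
    rfl
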